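-- pv_equiv track=rewrite | github.com/tjkpolisher/codingTestTheories | 프로그래머스/2/154540. 무인도 여행/무인도 여행.py | solution
-- ===== SOURCE A (Python) =====
-- from collections import deque
--
-- def solution(maps):
--     # X는 바다를, 숫자는 무인도를 나타냄.
--     answer = []
--     # 1. maps의 문자열 원소를 하나하나 문자로 쪼개고 리스트로 변환
--     len1 = len(maps)
--     len2 = len(maps[0])
--     for i in range(len1):
--         maps[i] = list(maps[i])
--
--     # 2. BFS를 실시하면서 전체 섬의 수를 더함
--     def bfs(i, j, score):
--         dx = [-1, 1, 0, 0]
--         dy = [0, 0, -1, 1]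
--
--         score = int(maps[i][j])
--         maps[i][j] = 'X'  # 시작점도 큐에 넣는 즉시 방문 처리
--
--         q = deque()
--         q.append((i, j))
--
--         while q:
--             x, y = q.popleft()
--             for k in range(4):
--                 nx = x + dx[k]
--                 ny = y + dy[k]
--                 if 0 <= nx < len1 and 0 <= ny < len2:
--                     if maps[nx][ny] != 'X':
--                         score += int(maps[nx][ny])
--                         maps[nx][ny] = 'X'  # 식량 수집 후, 해당 칸은 방문 처리
--                         q.append((nx, ny))
--         return score
--
--     for i in range(len1):
--         for j in range(len2):
--             if maps[i][j] != 'X':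
--                 tmp = 0
--                 score = bfs(i, j, tmp)
--                 answer.append(score)
--
--     # 3. 리스트가 비었으면(지낼 수 있는 무인도가 없으면) -1 리턴
--     if not answer:
--         return [-1]
--     # 4. 그 외의 경우, 리스트를 오름차순 정렬 후 리턴
--     return sorted(answer)
-- ===== SOURCE B (Python) =====
-- # B: union-find (disjoint-set forest) instead of BFS flood fill: one pass
-- # unions each land cell with its down/right land neighbours, a second pass
-- # groups cell values by find-root in a dict, then the component sums are
-- # sorted.  A mutates `maps` in place (rows to lists, visited cells to 'X');
-- # B does not -- the equivalence claimed is about the return value only.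
-- def solution(maps):
--     n = len(maps)
--     m = len(maps[0])
--     parent = {}
--     for i in range(n):
--         for j in range(m):
--             if maps[i][j] != 'X':
--                 parent[(i, j)] = (i, j)
--
--     def find(p):
--         while parent[p] != p:
--             p = parent[p]
--         return p
--
--     for i in range(n):
--         for j in range(m):
--             if (i, j) in parent:
--                 for q in ((i + 1, j), (i, j + 1)):
--                     if q in parent:
--                         parent[find((i, j))] = find(q)
--
--     sums = {}
--     for p in parent:
--         r = find(p)
--         sums[r] = sums.get(r, 0) + int(maps[p[0]][p[1]])
--     return sorted(sums.values()) or [-1]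
-- ===== Notes on version B (the rewrite author's own statement) =====
-- stated objective: alternative
-- what changed: BFS seed-expansion with a deque and destructive in-place 'X'-marking is replaced by a disjoint-set (union-find) forest: one grid pass unions each land cell with its down/right land neighbours, a second pass accumulates cell values into a dict keyed by find-root; A mutates `maps` in place, B does not (the return value is what is proved equal).
import Mathlib
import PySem

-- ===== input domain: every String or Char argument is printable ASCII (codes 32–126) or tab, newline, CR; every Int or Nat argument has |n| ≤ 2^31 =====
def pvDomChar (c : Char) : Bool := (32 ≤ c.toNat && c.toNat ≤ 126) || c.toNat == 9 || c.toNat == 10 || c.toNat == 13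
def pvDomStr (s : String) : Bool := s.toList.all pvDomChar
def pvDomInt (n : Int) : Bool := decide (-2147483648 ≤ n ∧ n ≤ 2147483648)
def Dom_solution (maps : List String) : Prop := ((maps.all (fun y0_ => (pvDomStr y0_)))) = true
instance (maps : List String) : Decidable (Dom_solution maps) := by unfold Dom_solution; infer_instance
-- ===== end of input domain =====

-- B replaces the BFS seed-expansion (deque + destructive 'X'-marking of the mutated grid) by a
-- disjoint-set forest: union each land cell with its down/right land neighbours, then group the
-- cell values by find-root.  A mutates `maps` in place, B does not — the theorem below is about
-- the RETURN value.

-- ===== PORT A =====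

-- int(<single-character cell>) ; exact on the digit cells Pre_ admits
def pyIntCell (c : Char) : Int := (PySem.Int.ofStr? (String.ofList [c])).getD 0

-- maps[x][y] on the list-of-lists grid (all reads are guarded in range, default never used there)
def gRead (g : List (List Char)) (x y : Int) : Char :=
  ((PySem.List.pyGet? g x).bind (fun r => PySem.List.pyGet? r y)).getD 'X'

-- maps[x][y] = 'X' ; x, y are guarded 0 ≤ · < bound at every call, so .toNat is exact here
def gWrite (g : List (List Char)) (x y : Int) : List (List Char) :=
  g.modify x.toNat (fun r => r.set y.toNat 'X')

-- body of A's 'for k in range(4)': one neighbour (dx[k], dy[k]) of the popped (x, y)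
def bfsStep (len1 len2 x y : Int)
    (st : List (List Char) × List (Int × Int) × Int) (d : Int × Int) :
    List (List Char) × List (Int × Int) × Int :=
  let nx := x + d.1
  let ny := y + d.2
  if 0 ≤ nx ∧ nx < len1 ∧ 0 ≤ ny ∧ ny < len2 then
    if gRead st.1 nx ny ≠ 'X' then
      (gWrite st.1 nx ny, st.2.1 ++ [(nx, ny)], st.2.2 + pyIntCell (gRead st.1 nx ny))
    else st
  else st

-- A's 'while q:' loop; fuel is only a totality guard (proved never exhausted under Pre_)
def bfsLoop (len1 len2 : Int) :
    Nat → List (List Char) → List (Int × Int) → Int → Int × List (List Char)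
  | 0, g, _, score => (score, g)
  | _ + 1, g, [], score => (score, g)
  | fuel + 1, g, (x, y) :: q, score =>
      let st := [((-1 : Int), (0 : Int)), (1, 0), (0, -1), (0, 1)].foldl
        (bfsStep len1 len2 x y) (g, q, score)
      bfsLoop len1 len2 fuel st.1 st.2.1 st.2.2

-- A's inner function bfs(i, j, score)
def bfsA (len1 len2 : Int) (g : List (List Char)) (i j : Int) : Int × List (List Char) :=
  let score := pyIntCell (gRead g i j)
  let g1 := gWrite g i j
  bfsLoop len1 len2 (2 * len1.toNat * len2.toNat + 1) g1 [(i, j)] score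

def solution (maps : List String) : List Int :=
  let len1 : Int := maps.length
  let len2 : Int := PySem.Str.len ((PySem.List.pyGet? maps 0).getD "")  -- len(maps[0]); [] raises, outside Pre_
  let g0 : List (List Char) := maps.map String.toList                   -- for i: maps[i] = list(maps[i])
  let res := (PySem.List.pyRange 0 len1 1).foldl (fun st i =>
      (PySem.List.pyRange 0 len2 1).foldl (fun (st : List (List Char) × List Int) j =>
        if gRead st.1 i j ≠ 'X' then
          let r := bfsA len1 len2 st.1 i j
          (r.2, st.2 ++ [r.1])
        else st) st) (g0, ([] : List Int))
  if res.2 = [] then [-1] else PySem.List.sorted res.2 (fun x => x) false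

-- ===== PORT B =====

-- maps[x][y] on the original (immutable) list of strings
def cellB (maps : List String) (x y : Int) : Char :=
  ((PySem.List.pyGet? maps x).bind (fun s => PySem.Str.pyGet? s y)).getD 'X'

-- B's find: 'while parent[p] != p: p = parent[p]'.  parent[p] is always present under Pre_
-- (the forest maps keys to keys), so getD's default is never used there; the fuel is only a
-- totality guard (a chain never revisits a node, so len(parent) steps always suffice).
def ufFind (par : PySem.Dict (Int × Int) (Int × Int)) : Nat → (Int × Int) → (Int × Int)
  | 0, p => p
  | fuel + 1, p =>
      let q := (PySem.Dict.get? par p).getD p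
      if q = p then p else ufFind par fuel q

def solution_alt (maps : List String) : List Int :=
  let n : Int := maps.length
  let m : Int := PySem.Str.len ((PySem.List.pyGet? maps 0).getD "")     -- len(maps[0]); [] raises, outside Pre_
  -- parent = {(i, j): (i, j) for land cells}
  let par0 := (PySem.List.pyRange 0 n 1).foldl (fun par i =>
      (PySem.List.pyRange 0 m 1).foldl (fun (par : PySem.Dict (Int × Int) (Int × Int)) j =>
        if cellB maps i j ≠ 'X' then PySem.Dict.insert par (i, j) (i, j) else par) par)
    PySem.Dict.empty
  -- union each land cell with its down/right land neighbours
  let par1 := (PySem.List.pyRange 0 n 1).foldl (fun par i =>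
      (PySem.List.pyRange 0 m 1).foldl (fun (par : PySem.Dict (Int × Int) (Int × Int)) j =>
        if PySem.Dict.contains par (i, j) then
          [((i + 1 : Int), j), (i, (j + 1 : Int))].foldl (fun par q =>
            if PySem.Dict.contains par q then
              PySem.Dict.insert par (ufFind par (PySem.Dict.items par).length (i, j))
                (ufFind par (PySem.Dict.items par).length q)
            else par) par
        else par) par) par0
  -- sums[find(p)] += int(maps[p[0]][p[1]])
  let sums := (PySem.Dict.keys par1).foldl (fun (s : PySem.Dict (Int × Int) Int) p =>
      let r := ufFind par1 (PySem.Dict.items par1).length p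
      PySem.Dict.insert s r (PySem.Dict.getD s r 0 + pyIntCell (cellB maps p.1 p.2)))
    PySem.Dict.empty
  -- sorted(sums.values()) or [-1]
  let sv := PySem.List.sorted (PySem.Dict.values sums) (fun x => x) false
  if sv = [] then [-1] else sv

-- ===== PRECONDITION & SPEC =====
-- Pre_ is exactly where the Python A returns: a nonempty maps (len(maps[0]) raises IndexError on []),
-- every row at least as long as the first (shorter rows raise IndexError), and every cell in the
-- first len(maps[0]) columns either 'X' or a decimal digit (anything else raises ValueError in int()).
def Pre_solution (maps : List String) : Prop :=
  maps ≠ [] ∧ ∀ s ∈ maps,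
    (maps.headD "").toList.length ≤ s.toList.length ∧
    ((s.toList.take (maps.headD "").toList.length).all (fun c => c == 'X' || c.isDigit)) = true

instance (maps : List String) : Decidable (Pre_solution maps) := by
  unfold Pre_solution; infer_instance

def pvWitness_solution : List String := ["X90", "14X"]

def Spec_solution (maps : List String) (out : List Int) : Prop := out = solution_alt maps
instance (maps : List String) (out : List Int) : Decidable (Spec_solution maps out) := by unfold Spec_solution; infer_instance

-- ===== CLAIM (what is proved, stated in full; the proofs are below) =====
def Claim_equal_solution : Prop := ∀ (maps : List String), Dom_solution maps → Pre_solution maps → Spec_solution maps (solution maps)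

-- ===== LEMMAS AND PROOFS =====

-- proof-side abbreviations (used only by the proofs below)
def pvN (maps : List String) : Int := (maps.length : Int)
def pvM (maps : List String) : Int := PySem.Str.len ((PySem.List.pyGet? maps 0).getD "")

def cellOf (maps : List String) (p : Int × Int) : Char := cellB maps p.1 p.2

def pvLand (maps : List String) (p : Int × Int) : Prop :=
  0 ≤ p.1 ∧ p.1 < pvN maps ∧ 0 ≤ p.2 ∧ p.2 < pvM maps ∧ cellB maps p.1 p.2 ≠ 'X'

def pvNbrs (p : Int × Int) : List (Int × Int) :=
  [(p.1 - 1, p.2), (p.1 + 1, p.2), (p.1, p.2 - 1), (p.1, p.2 + 1)]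

def pvReach (maps : List String) (V : Finset (Int × Int)) (s p : Int × Int) : Prop :=
  Relation.ReflTransGen (fun a b => b ∈ pvNbrs a ∧ pvLand maps b ∧ b ∉ V) s p

noncomputable def pvLandFin (maps : List String) : Finset (Int × Int) :=
  ((Finset.Icc 0 (pvN maps - 1)) ×ˢ (Finset.Icc 0 (pvM maps - 1))).filter
    (fun p => cellB maps p.1 p.2 ≠ 'X')

def pvVal (maps : List String) (p : Int × Int) : Int := pyIntCell (cellB maps p.1 p.2)

-- the connected component of seed s avoiding V, characterised without computing it
def CompOK (maps : List String) (V : Finset (Int × Int)) (s : Int × Int)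
    (C : Finset (Int × Int)) : Prop :=
  (∀ p ∈ C, pvLand maps p ∧ p ∉ V ∧ pvReach maps V s p) ∧ s ∈ C ∧
  (∀ p ∈ C, ∀ d ∈ pvNbrs p, pvLand maps d → d ∉ V → d ∈ C)

-- A's mutated grid g realises marked-set M over the original maps
def RepA (maps : List String) (g : List (List Char)) (M : Finset (Int × Int)) : Prop :=
  g.map List.length = maps.map (fun s => s.toList.length) ∧
  ∀ x y : Int, 0 ≤ x → x < pvN maps → 0 ≤ y → y < pvM maps →
    gRead g x y = if (x, y) ∈ M then 'X' else cellB maps x y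

-- rows are at least pvM long (a consequence of Pre_)
def RowsOK (maps : List String) : Prop :=
  ∀ s ∈ maps, pvM maps ≤ (s.toList.length : Int)

lemma mem_landFin (maps : List String) (p : Int × Int) :
    p ∈ pvLandFin maps ↔ pvLand maps p := by
  simp only [pvLandFin, Finset.mem_filter, Finset.mem_product, Finset.mem_Icc, pvLand]
  constructor
  · rintro ⟨⟨⟨h1, h2⟩, h3, h4⟩, h5⟩; exact ⟨h1, by omega, h3, by omega, h5⟩
  · rintro ⟨h1, h2, h3, h4, h5⟩; exact ⟨⟨⟨h1, by omega⟩, h3, by omega⟩, h5⟩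

lemma card_landFin (maps : List String) :
    (pvLandFin maps).card ≤ (pvN maps).toNat * (pvM maps).toNat := by
  calc (pvLandFin maps).card
      ≤ ((Finset.Icc 0 (pvN maps - 1)) ×ˢ (Finset.Icc 0 (pvM maps - 1))).card :=
        Finset.card_filter_le _ _
    _ = (pvN maps).toNat * (pvM maps).toNat := by
        rw [Finset.card_product, Int.card_Icc, Int.card_Icc]; congr 1 <;> omega

lemma compOK_unique {maps : List String} {V : Finset (Int × Int)} {s : Int × Int}
    {C1 C2 : Finset (Int × Int)} (h1 : CompOK maps V s C1) (h2 : CompOK maps V s C2) :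
    C1 = C2 := by
  obtain ⟨m1, s1, c1⟩ := h1
  obtain ⟨m2, s2, c2⟩ := h2
  have sub : ∀ (A B : Finset (Int × Int)),
      (∀ p ∈ A, pvLand maps p ∧ p ∉ V ∧ pvReach maps V s p) → s ∈ B →
      (∀ p ∈ B, ∀ d ∈ pvNbrs p, pvLand maps d → d ∉ V → d ∈ B) → A ⊆ B := by
    intro A B mA sB cB p hp
    have hr := (mA p hp).2.2
    clear hp
    induction hr with
    | refl => exact sB
    | tail _ h ih => exact cB _ ih _ h.1 h.2.1 h.2.2
  exact Finset.Subset.antisymm (sub C1 C2 m1 s2 c2) (sub C2 C1 m2 s1 c1)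

lemma sum_diff_int (f : Int × Int → Int) {M M' : Finset (Int × Int)} (h : M ⊆ M') :
    (∑ p ∈ M' \ M, f p) = (∑ p ∈ M', f p) - (∑ p ∈ M, f p) := by
  have := Finset.sum_sdiff (f := f) h
  omega

-- ---- grid read/write lemmas for port A ----

lemma pvM_eq (maps : List String) : pvM maps = ((maps.headD "").toList.length : Int) := by
  cases maps with
  | nil => simp [pvM, PySem.List.pyGet?, PySem.Str.len_eq]
  | cons a l => simp [pvM, PySem.Str.len_eq]

lemma gRead_of_nonneg (g : List (List Char)) (x y : Int) (hx0 : 0 ≤ x) (hy0 : 0 ≤ y) :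
    gRead g x y = ((g[x.toNat]?).bind (fun r => r[y.toNat]?)).getD 'X' := by
  simp [gRead, PySem.List.pyGet?_of_nonneg _ hx0, PySem.List.pyGet?_of_nonneg _ hy0]

lemma gWrite_map_length (g : List (List Char)) (x y : Int) :
    (gWrite g x y).map List.length = g.map List.length := by
  apply List.ext_getElem
  · simp [gWrite]
  · intro k h1 h2
    simp only [gWrite, List.getElem_map, List.getElem_modify]
    split <;> simp

lemma map_len_len {g : List (List Char)} {maps : List String}
    (h : g.map List.length = maps.map (fun s => s.toList.length)) :
    g.length = maps.length := by
  have := congrArg List.length h; simpa using this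

lemma row_len {g : List (List Char)} {maps : List String}
    (h : g.map List.length = maps.map (fun s => s.toList.length))
    (k : Nat) (hk : k < g.length) (hk' : k < maps.length) :
    (g[k]'hk).length = (maps[k]'hk').toList.length := by
  have := congrArg (fun l => l[k]?) h
  simp only [List.getElem?_map, List.getElem?_eq_getElem hk, List.getElem?_eq_getElem hk',
    Option.map_some] at this
  exact Option.some.inj this

lemma gRead_gWrite (g : List (List Char)) (x y x' y' : Int)
    (hx0 : 0 ≤ x) (hx : x.toNat < g.length) (hy0 : 0 ≤ y)
    (hy : y.toNat < (g[x.toNat]'hx).length)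
    (hx0' : 0 ≤ x') (hx' : x'.toNat < g.length) (hy0' : 0 ≤ y')
    (_hy' : y'.toNat < (g[x'.toNat]'hx').length) :
    gRead (gWrite g x y) x' y' = if x' = x ∧ y' = y then 'X' else gRead g x' y' := by
  rw [gRead_of_nonneg _ _ _ hx0' hy0', gRead_of_nonneg _ _ _ hx0' hy0']
  have hrowq : (gWrite g x y)[x'.toNat]?
      = some (if x.toNat = x'.toNat then (g[x'.toNat]'hx').set y.toNat 'X'
              else g[x'.toNat]'hx') := by
    simp [gWrite, List.getElem?_modify, List.getElem?_eq_getElem hx']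
  rw [hrowq, List.getElem?_eq_getElem hx']
  simp only [Option.bind_some]
  by_cases hxx : x' = x
  · subst hxx
    by_cases hyy : y' = y
    · subst hyy
      simp [hy]
    · have hne : y.toNat ≠ y'.toNat := by omega
      simp [hne, hyy]
  · have hne : x.toNat ≠ x'.toNat := by omega
    simp [hne, hxx]

lemma repA_write {maps : List String} {g : List (List Char)} {M : Finset (Int × Int)}
    (hrow : RowsOK maps) (hrep : RepA maps g M) {x y : Int}
    (hx0 : 0 ≤ x) (hx1 : x < pvN maps) (hy0 : 0 ≤ y) (hy1 : y < pvM maps) :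
    RepA maps (gWrite g x y) (insert (x, y) M) := by
  obtain ⟨hlen, hread⟩ := hrep
  have hgl : g.length = maps.length := map_len_len hlen
  have hrl : ∀ (a : Int), 0 ≤ a → a < pvN maps → ∀ (h : a.toNat < g.length),
      pvM maps ≤ ((g[a.toNat]'h).length : Int) := by
    intro a ha0 ha1 h
    have hm : a.toNat < maps.length := by omega
    rw [row_len hlen a.toNat h hm]
    exact hrow _ (List.getElem_mem hm)
  refine ⟨by rw [gWrite_map_length]; exact hlen, ?_⟩
  intro x' y' hx0' hx1' hy0' hy1'
  have hx : x.toNat < g.length := by simp only [pvN] at hx1; omega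
  have hx' : x'.toNat < g.length := by simp only [pvN] at hx1'; omega
  have hy : y.toNat < (g[x.toNat]'hx).length := by
    have := hrl x hx0 hx1 hx; omega
  have hy' : y'.toNat < (g[x'.toNat]'hx').length := by
    have := hrl x' hx0' hx1' hx'; omega
  rw [gRead_gWrite g x y x' y' hx0 hx hy0 hy hx0' hx' hy0' hy']
  rw [hread x' y' hx0' hx1' hy0' hy1']
  by_cases hp : (x', y') = (x, y)
  · have h1 : x' = x ∧ y' = y := Prod.mk.injEq .. ▸ hp
    simp [h1]
  · have h1 : ¬(x' = x ∧ y' = y) := by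
      intro ⟨a, b⟩; exact hp (by rw [a, b])
    simp [h1, hp, Finset.mem_insert]

-- the invariant carried through A's flood-fill loop
def PvInv (maps : List String) (V : Finset (Int × Int)) (s : Int × Int)
    (M : Finset (Int × Int)) (q : List (Int × Int)) : Prop :=
  V ⊆ M ∧ M ⊆ pvLandFin maps ∧ s ∈ M ∧
  (∀ p ∈ M, p ∉ V → pvReach maps V s p) ∧
  (∀ p ∈ q, p ∈ M ∧ p ∉ V) ∧
  (∀ p ∈ M, p ∉ V → p ∉ q → ∀ d ∈ pvNbrs p, pvLand maps d → d ∈ M)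

-- ---- port A: inner neighbour fold ----

lemma bfsFold_spec (maps : List String) (hrow : RowsOK maps)
    (V : Finset (Int × Int)) (s : Int × Int) (x y : Int)
    (_hxy : (x, y) ∈ pvLandFin maps) (hreach : pvReach maps V s (x, y)) :
    ∀ (es : List (Int × Int)) (g : List (List Char)) (q : List (Int × Int)) (score : Int)
      (M : Finset (Int × Int)),
      (∀ e ∈ es, (x + e.1, y + e.2) ∈ pvNbrs (x, y)) →
      RepA maps g M → PvInv maps V s M ((x, y) :: q) →
      (let st := es.foldl (bfsStep (pvN maps) (pvM maps) x y) (g, q, score)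
       ∃ M' : Finset (Int × Int),
         M ⊆ M' ∧ RepA maps st.1 M' ∧ PvInv maps V s M' ((x, y) :: st.2.1) ∧
         st.2.1.length + M.card = q.length + M'.card ∧
         st.2.2 = score + ((∑ p ∈ M', pvVal maps p) - ∑ p ∈ M, pvVal maps p) ∧
         (∀ e ∈ es, pvLand maps (x + e.1, y + e.2) → (x + e.1, y + e.2) ∈ M')) := by
  intro es
  induction es with
  | nil =>
    intro g q score M _ hrep hinv
    exact ⟨M, Finset.Subset.refl M, hrep, hinv, rfl, by simp, by simp⟩
  | cons e es ih =>
    intro g q score M hes hrep hinv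
    simp only [List.foldl_cons]
    have hmem_nbrs : (x + e.1, y + e.2) ∈ pvNbrs (x, y) := hes e (by simp)
    obtain ⟨hVM, hLF, hsM, hre, hq, hclo⟩ := hinv
    by_cases h1 : 0 ≤ x + e.1 ∧ x + e.1 < pvN maps ∧ 0 ≤ y + e.2 ∧ y + e.2 < pvM maps
    · have hread := hrep.2 (x + e.1) (y + e.2) h1.1 h1.2.1 h1.2.2.1 h1.2.2.2
      by_cases h2 : (x + e.1, y + e.2) ∈ M
      · have hstep : bfsStep (pvN maps) (pvM maps) x y (g, q, score) e = (g, q, score) := by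
          simp only [bfsStep]
          rw [if_pos h1, hread, if_pos h2]
          simp
        rw [hstep]
        obtain ⟨M', hMM', hrep', hinv', hlen', hsc', hg'⟩ :=
          ih g q score M (fun d hd => hes d (by simp [hd])) hrep
            ⟨hVM, hLF, hsM, hre, hq, hclo⟩
        exact ⟨M', hMM', hrep', hinv', hlen', hsc', fun d hd hl => by
          rcases List.mem_cons.1 hd with h | h
          · subst h; exact hMM' h2
          · exact hg' d h hl⟩
      · by_cases h3 : cellB maps (x + e.1) (y + e.2) = 'X'
        · have hstep : bfsStep (pvN maps) (pvM maps) x y (g, q, score) e = (g, q, score) := by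
            simp only [bfsStep]
            rw [if_pos h1, hread, if_neg h2]
            simp [h3]
          rw [hstep]
          obtain ⟨M', hMM', hrep', hinv', hlen', hsc', hg'⟩ :=
            ih g q score M (fun d hd => hes d (by simp [hd])) hrep
              ⟨hVM, hLF, hsM, hre, hq, hclo⟩
          exact ⟨M', hMM', hrep', hinv', hlen', hsc', fun d hd hl => by
            rcases List.mem_cons.1 hd with h | h
            · subst h; exact absurd h3 hl.2.2.2.2
            · exact hg' d h hl⟩
        · -- the neighbour is fresh land: it is marked, enqueued and scored
          have hland : pvLand maps (x + e.1, y + e.2) :=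
            ⟨h1.1, h1.2.1, h1.2.2.1, h1.2.2.2, h3⟩
          have hstep : bfsStep (pvN maps) (pvM maps) x y (g, q, score) e =
              (gWrite g (x + e.1) (y + e.2), q ++ [(x + e.1, y + e.2)],
                score + pvVal maps (x + e.1, y + e.2)) := by
            simp only [bfsStep]
            rw [if_pos h1, hread, if_neg h2]
            simp [h3, pvVal]
          rw [hstep]
          have hndV : (x + e.1, y + e.2) ∉ V := fun hv => h2 (hVM hv)
          have hreach' : pvReach maps V s (x + e.1, y + e.2) :=
            Relation.ReflTransGen.tail hreach ⟨hmem_nbrs, hland, hndV⟩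
          have hrep1 : RepA maps (gWrite g (x + e.1) (y + e.2))
              (insert (x + e.1, y + e.2) M) :=
            repA_write hrow hrep h1.1 h1.2.1 h1.2.2.1 h1.2.2.2
          have hinv1 : PvInv maps V s (insert (x + e.1, y + e.2) M)
              ((x, y) :: (q ++ [(x + e.1, y + e.2)])) := by
            refine ⟨fun p hp => Finset.mem_insert_of_mem (hVM hp),
              ?_, Finset.mem_insert_of_mem hsM, ?_, ?_, ?_⟩
            · intro p hp
              rcases Finset.mem_insert.1 hp with h | h
              · subst h; exact (mem_landFin maps _).2 hland
              · exact hLF h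
            · intro p hp hpV
              rcases Finset.mem_insert.1 hp with h | h
              · subst h; exact hreach'
              · exact hre p h hpV
            · intro p hp
              rcases List.mem_cons.1 hp with h | h
              · subst h
                rcases hq (x, y) (List.mem_cons_self ..) with ⟨ha, hb⟩
                exact ⟨Finset.mem_insert_of_mem ha, hb⟩
              · rcases List.mem_append.1 h with h | h
                · rcases hq p (List.mem_cons_of_mem _ h) with ⟨ha, hb⟩
                  exact ⟨Finset.mem_insert_of_mem ha, hb⟩
                · rcases List.mem_singleton.1 h with rfl
                  exact ⟨Finset.mem_insert_self _ _, hndV⟩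
            · intro p hp hpV hpq d hd hl
              have hpne : p ≠ (x + e.1, y + e.2) := by
                intro h; subst h
                exact hpq (by simp)
              have hpM : p ∈ M := by
                rcases Finset.mem_insert.1 hp with h | h
                · exact absurd h hpne
                · exact h
              have hpq' : p ∉ (x, y) :: q := by
                intro h
                rcases List.mem_cons.1 h with h | h
                · exact hpq (by simp [h])
                · exact hpq (by simp [h])
              exact Finset.mem_insert_of_mem (hclo p hpM hpV hpq' d hd hl)
          obtain ⟨M', hMM', hrep', hinv', hlen', hsc', hg'⟩ :=
            ih (gWrite g (x + e.1) (y + e.2)) (q ++ [(x + e.1, y + e.2)])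
              (score + pvVal maps (x + e.1, y + e.2)) (insert (x + e.1, y + e.2) M)
              (fun d hd => hes d (by simp [hd])) hrep1 hinv1
          refine ⟨M', fun p hp => hMM' (Finset.mem_insert_of_mem hp), hrep', hinv', ?_, ?_, ?_⟩
          · have hc := Finset.card_insert_of_notMem h2
            simp only [List.length_append, List.length_cons, List.length_nil] at hlen' ⊢
            omega
          · rw [hsc', Finset.sum_insert h2]
            ring
          · intro d hd hl
            rcases List.mem_cons.1 hd with h | h
            · subst h; exact hMM' (Finset.mem_insert_self _ _)
            · exact hg' d h hl
    · have hstep : bfsStep (pvN maps) (pvM maps) x y (g, q, score) e = (g, q, score) := by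
        simp only [bfsStep]
        rw [if_neg h1]
      rw [hstep]
      obtain ⟨M', hMM', hrep', hinv', hlen', hsc', hg'⟩ :=
        ih g q score M (fun d hd => hes d (by simp [hd])) hrep
          ⟨hVM, hLF, hsM, hre, hq, hclo⟩
      exact ⟨M', hMM', hrep', hinv', hlen', hsc', fun d hd hl => by
        rcases List.mem_cons.1 hd with h | h
        · subst h; exact absurd ⟨hl.1, hl.2.1, hl.2.2.1, hl.2.2.2.1⟩ h1
        · exact hg' d h hl⟩

lemma offsets_nbrs (x y : Int) :
    ∀ e ∈ [((-1 : Int), (0 : Int)), (1, 0), (0, -1), (0, 1)],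
      (x + e.1, y + e.2) ∈ pvNbrs (x, y) := by
  intro e he
  simp only [List.mem_cons, List.not_mem_nil, or_false] at he
  rcases he with rfl | rfl | rfl | rfl <;> simp [pvNbrs, Prod.ext_iff] <;> omega

lemma nbrs_from_offsets (x y : Int) (d : Int × Int) (hd : d ∈ pvNbrs (x, y)) :
    ∃ e ∈ [((-1 : Int), (0 : Int)), (1, 0), (0, -1), (0, 1)], d = (x + e.1, y + e.2) := by
  simp only [pvNbrs, List.mem_cons, List.not_mem_nil, or_false] at hd
  rcases hd with rfl | rfl | rfl | rfl
  · exact ⟨(-1, 0), by simp, by simp [Prod.ext_iff]; omega⟩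
  · exact ⟨(1, 0), by simp, by simp⟩
  · exact ⟨(0, -1), by simp, by simp [Prod.ext_iff]; omega⟩
  · exact ⟨(0, 1), by simp, by simp⟩

-- ---- port A: the while loop ----

lemma bfsLoop_spec (maps : List String) (hrow : RowsOK maps)
    (V : Finset (Int × Int)) (s : Int × Int) :
    ∀ (fuel : Nat) (g : List (List Char)) (q : List (Int × Int)) (score : Int)
      (M : Finset (Int × Int)),
      RepA maps g M → PvInv maps V s M q →
      2 * ((pvLandFin maps).card - M.card) + q.length ≤ fuel →
      (let r := bfsLoop (pvN maps) (pvM maps) fuel g q score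
       ∃ M' : Finset (Int × Int),
         M ⊆ M' ∧ RepA maps r.2 M' ∧ PvInv maps V s M' [] ∧
         (∀ p ∈ M', p ∉ V → ∀ d ∈ pvNbrs p, pvLand maps d → d ∈ M') ∧
         r.1 = score + ((∑ p ∈ M', pvVal maps p) - ∑ p ∈ M, pvVal maps p)) := by
  intro fuel
  induction fuel with
  | zero =>
    intro g q score M hrep hinv hfu
    have hq : q = [] := List.eq_nil_of_length_eq_zero (by omega)
    subst hq
    obtain ⟨hVM, hLF, hsM, hre, hqc, hclo⟩ := hinv
    exact ⟨M, Finset.Subset.refl M, hrep, ⟨hVM, hLF, hsM, hre, by simp, hclo⟩,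
      fun p hp hpV d hd hl => hclo p hp hpV (by simp) d hd hl, by simp [bfsLoop]⟩
  | succ fuel ih =>
    intro g q score M hrep hinv hfu
    cases q with
    | nil =>
      obtain ⟨hVM, hLF, hsM, hre, hqc, hclo⟩ := hinv
      exact ⟨M, Finset.Subset.refl M, hrep, ⟨hVM, hLF, hsM, hre, by simp, hclo⟩,
        fun p hp hpV d hd hl => hclo p hp hpV (by simp) d hd hl, by simp [bfsLoop]⟩
    | cons hd tl =>
      obtain ⟨x, y⟩ := hd
      have hxyM : (x, y) ∈ M ∧ (x, y) ∉ V := hinv.2.2.2.2.1 (x, y) (List.mem_cons_self ..)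
      have hxyLF : (x, y) ∈ pvLandFin maps := hinv.2.1 hxyM.1
      have hxyre : pvReach maps V s (x, y) := hinv.2.2.2.1 (x, y) hxyM.1 hxyM.2
      obtain ⟨M1, hMM1, hrep1, hinv1, hlen1, hsc1, hg1⟩ :=
        bfsFold_spec maps hrow V s x y hxyLF hxyre
          [((-1 : Int), (0 : Int)), (1, 0), (0, -1), (0, 1)] g tl score M
          (offsets_nbrs x y) hrep hinv
      set st := [((-1 : Int), (0 : Int)), (1, 0), (0, -1), (0, 1)].foldl
        (bfsStep (pvN maps) (pvM maps) x y) (g, tl, score) with hst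
      obtain ⟨hVM1, hLF1, hsM1, hre1, hqc1, hclo1⟩ := hinv1
      have hinv2 : PvInv maps V s M1 st.2.1 := by
        refine ⟨hVM1, hLF1, hsM1, hre1,
          fun p hp => hqc1 p (List.mem_cons_of_mem _ hp), ?_⟩
        intro p hp hpV hpq d hd hl
        by_cases hpxy : p = (x, y)
        · subst hpxy
          obtain ⟨e, he, rfl⟩ := nbrs_from_offsets x y d hd
          exact hg1 e he hl
        · exact hclo1 p hp hpV (by simp [hpxy, hpq]) d hd hl
      have hcard1 : M.card ≤ M1.card := Finset.card_le_card hMM1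
      have hcardL : M1.card ≤ (pvLandFin maps).card := Finset.card_le_card hLF1
      have hfu2 : 2 * ((pvLandFin maps).card - M1.card) + st.2.1.length ≤ fuel := by
        simp only [List.length_cons] at hfu
        omega
      obtain ⟨M', hM1M', hrep', hinv', hclo', hsc'⟩ :=
        ih st.1 st.2.1 st.2.2 M1 hrep1 hinv2 hfu2
      refine ⟨M', fun p hp => hM1M' (hMM1 hp), ?_, hinv', hclo', ?_⟩
      · show RepA maps (bfsLoop (pvN maps) (pvM maps) (fuel + 1) g ((x, y) :: tl) score).2 M'
        simp only [bfsLoop]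
        exact hrep'
      · show (bfsLoop (pvN maps) (pvM maps) (fuel + 1) g ((x, y) :: tl) score).1 = _
        simp only [bfsLoop]
        rw [hsc', hsc1]
        ring

-- endgame of the loop invariant: a finished Inv names the component
lemma inv_to_comp (maps : List String) (V : Finset (Int × Int)) (s : Int × Int)
    (M' : Finset (Int × Int)) (hsV : s ∉ V)
    (hinv : PvInv maps V s M' [])
    (hclo : ∀ p ∈ M', p ∉ V → ∀ d ∈ pvNbrs p, pvLand maps d → d ∈ M') :
    CompOK maps V s (M' \ V) ∧ M' = V ∪ (M' \ V) := by
  obtain ⟨hVM, hLF, hsM, hre, _, _⟩ := hinv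
  refine ⟨⟨?_, ?_, ?_⟩, ?_⟩
  · intro p hp
    rw [Finset.mem_sdiff] at hp
    exact ⟨(mem_landFin maps p).1 (hLF hp.1), hp.2, hre p hp.1 hp.2⟩
  · rw [Finset.mem_sdiff]; exact ⟨hsM, hsV⟩
  · intro p hp d hd hl hdV
    rw [Finset.mem_sdiff] at hp ⊢
    exact ⟨hclo p hp.1 hp.2 d hd hl, hdV⟩
  · rw [Finset.union_sdiff_of_subset hVM]

-- ---- port A: bfs(i, j) ----

lemma bfsA_spec (maps : List String) (hrow : RowsOK maps)
    (g : List (List Char)) (M : Finset (Int × Int)) (s : Int × Int)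
    (hrep : RepA maps g M) (hM : M ⊆ pvLandFin maps)
    (hland : pvLand maps s) (hsM : s ∉ M) :
    ∃ C : Finset (Int × Int), CompOK maps M s C ∧
      (bfsA (pvN maps) (pvM maps) g s.1 s.2).1 = (∑ p ∈ C, pvVal maps p) ∧
      RepA maps (bfsA (pvN maps) (pvM maps) g s.1 s.2).2 (M ∪ C) ∧
      M ∪ C ⊆ pvLandFin maps := by
  obtain ⟨hb1, hb2, hb3, hb4, hb5⟩ := hland
  have hread : gRead g s.1 s.2 = cellB maps s.1 s.2 := by
    rw [hrep.2 s.1 s.2 hb1 hb2 hb3 hb4, if_neg (by simpa using hsM)]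
  have hrep1 : RepA maps (gWrite g s.1 s.2) (insert s M) := by
    have h := repA_write hrow hrep hb1 hb2 hb3 hb4
    simpa using h
  have hsLF : s ∈ pvLandFin maps := (mem_landFin maps s).2 ⟨hb1, hb2, hb3, hb4, hb5⟩
  have hinv0 : PvInv maps M s (insert s M) [s] := by
    refine ⟨Finset.subset_insert _ _, Finset.insert_subset hsLF hM,
      Finset.mem_insert_self _ _, ?_, ?_, ?_⟩
    · intro p hp hpM
      rcases Finset.mem_insert.1 hp with rfl | h
      · exact Relation.ReflTransGen.refl
      · exact absurd h hpM
    · intro p hp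
      rcases List.mem_singleton.1 hp with rfl
      exact ⟨Finset.mem_insert_self _ _, hsM⟩
    · intro p hp hpM hpq
      rcases Finset.mem_insert.1 hp with rfl | h
      · exact absurd (List.mem_singleton.2 rfl) hpq
      · exact absurd h hpM
  have hfu : 2 * ((pvLandFin maps).card - (insert s M).card) + [s].length ≤
      2 * (pvN maps).toNat * (pvM maps).toNat + 1 := by
    have hc := card_landFin maps
    have h2 : 2 * (pvN maps).toNat * (pvM maps).toNat
        = 2 * ((pvN maps).toNat * (pvM maps).toNat) := by ring
    simp only [List.length_cons, List.length_nil]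
    omega
  obtain ⟨M', hMM', hrep', hinv', hclo', hsc'⟩ :=
    bfsLoop_spec maps hrow M s (2 * (pvN maps).toNat * (pvM maps).toNat + 1)
      (gWrite g s.1 s.2) [s] (pvVal maps s) (insert s M) hrep1 hinv0 hfu
  have hsub : M ⊆ M' := (Finset.subset_insert s M).trans hMM'
  obtain ⟨hcomp, hMeq⟩ := inv_to_comp maps M s M' hsM hinv' hclo'
  have hbfs : bfsA (pvN maps) (pvM maps) g s.1 s.2
      = bfsLoop (pvN maps) (pvM maps) (2 * (pvN maps).toNat * (pvM maps).toNat + 1)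
        (gWrite g s.1 s.2) [s] (pyIntCell (gRead g s.1 s.2)) := by
    simp only [bfsA, Prod.mk.eta]
  have hval : pyIntCell (gRead g s.1 s.2) = pvVal maps s := by rw [hread]; rfl
  have hMC : M ∪ M' \ M = M' := Finset.union_sdiff_of_subset hsub
  refine ⟨M' \ M, hcomp, ?_, ?_, ?_⟩
  · rw [hbfs, hval, hsc', sum_diff_int (pvVal maps) hsub, Finset.sum_insert hsM]
    ring
  · rw [hbfs, hval, hMC]
    exact hrep'
  · rw [hMC]
    exact hinv'.2.1

lemma gRead_map (maps : List String) (x y : Int) (hx0 : 0 ≤ x) (hy0 : 0 ≤ y) :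
    gRead (maps.map String.toList) x y = cellB maps x y := by
  rw [gRead_of_nonneg _ _ _ hx0 hy0]
  simp only [cellB, PySem.List.pyGet?_of_nonneg _ hx0, List.getElem?_map]
  cases maps[x.toNat]? with
  | none => rfl
  | some r => simp [PySem.List.pyGet?_of_nonneg _ hy0]

-- ---- connectivity on the immutable grid ----

def pvConn (maps : List String) (p q : Int × Int) : Prop :=
  Relation.ReflTransGen (fun a b => b ∈ pvNbrs a ∧ pvLand maps b) p q

lemma nbrs_symm (a b : Int × Int) : b ∈ pvNbrs a ↔ a ∈ pvNbrs b := by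
  simp only [pvNbrs, List.mem_cons, List.not_mem_nil, or_false, Prod.ext_iff]
  constructor <;> (rintro (⟨h1, h2⟩ | ⟨h1, h2⟩ | ⟨h1, h2⟩ | ⟨h1, h2⟩) <;> omega)

lemma pvConn_land {maps : List String} {p q : Int × Int}
    (hp : pvLand maps p) (h : pvConn maps p q) : pvLand maps q := by
  induction h with
  | refl => exact hp
  | tail _ hs _ => exact hs.2

lemma pvConn_symm {maps : List String} {p q : Int × Int}
    (hp : pvLand maps p) (h : pvConn maps p q) : pvConn maps q p := by
  induction h with
  | refl => exact Relation.ReflTransGen.refl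
  | @tail a b hc hs ih =>
    have hcl : pvLand maps a := pvConn_land hp hc
    exact Relation.ReflTransGen.trans
      (Relation.ReflTransGen.single ⟨(nbrs_symm _ _).1 hs.1, hcl⟩) ih

-- the full connected component of a seed
noncomputable def pvComp (maps : List String) (c : Int × Int) : Finset (Int × Int) :=
  @Finset.filter _ (fun p => pvConn maps c p) (fun _ => Classical.propDecidable _)
    (pvLandFin maps)

lemma mem_pvComp {maps : List String} {c p : Int × Int} :
    p ∈ pvComp maps c ↔ pvLand maps p ∧ pvConn maps c p := by
  simp [pvComp, Finset.mem_filter, mem_landFin, and_comm]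

def pvClosed (maps : List String) (M : Finset (Int × Int)) : Prop :=
  ∀ p ∈ M, ∀ d ∈ pvNbrs p, pvLand maps d → d ∈ M

lemma closed_chain {maps : List String} {M : Finset (Int × Int)} {p q : Int × Int}
    (hcl : pvClosed maps M) (hp : p ∈ M) (h : pvConn maps p q) : q ∈ M := by
  induction h with
  | refl => exact hp
  | tail _ hs ih => exact hcl _ ih _ hs.1 hs.2

lemma compOK_of_closed {maps : List String} {M : Finset (Int × Int)} {s : Int × Int}
    (hs : pvLand maps s) (hsM : s ∉ M) (hcl : pvClosed maps M) :
    CompOK maps M s (pvComp maps s) := by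
  have hout : ∀ p, pvLand maps p → pvConn maps s p → p ∉ M := by
    intro p hpl hsp hpM
    exact hsM (closed_chain hcl hpM (pvConn_symm hs hsp))
  have hreach : ∀ p, pvConn maps s p → pvReach maps M s p := by
    intro p hsp
    induction hsp with
    | refl => exact Relation.ReflTransGen.refl
    | @tail a b hc hstep ih =>
      have hbM : b ∉ M := hout b hstep.2 (hc.tail hstep)
      exact Relation.ReflTransGen.tail ih ⟨hstep.1, hstep.2, hbM⟩
  refine ⟨?_, ?_, ?_⟩
  · intro p hp
    obtain ⟨hpl, hsp⟩ := mem_pvComp.1 hp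
    exact ⟨hpl, hout p hpl hsp, hreach p hsp⟩
  · exact mem_pvComp.2 ⟨hs, Relation.ReflTransGen.refl⟩
  · intro p hp d hd hl _
    obtain ⟨_, hsp⟩ := mem_pvComp.1 hp
    exact mem_pvComp.2 ⟨hl, hsp.tail ⟨hd, hl⟩⟩

-- ---- the row-major cell list and the land list ----

def pvCells (maps : List String) : List (Int × Int) :=
  (PySem.List.pyRange 0 (pvN maps) 1).flatMap
    (fun i => (PySem.List.pyRange 0 (pvM maps) 1).map (fun j => (i, j)))

lemma mem_pvCells {maps : List String} {c : Int × Int} :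
    c ∈ pvCells maps ↔ 0 ≤ c.1 ∧ c.1 < pvN maps ∧ 0 ≤ c.2 ∧ c.2 < pvM maps := by
  simp only [pvCells, List.mem_flatMap, List.mem_map, PySem.List.mem_pyRange_one]
  constructor
  · rintro ⟨i, ⟨h1, h2⟩, j, ⟨h3, h4⟩, rfl⟩
    exact ⟨h1, h2, h3, h4⟩
  · rintro ⟨h1, h2, h3, h4⟩
    exact ⟨c.1, ⟨h1, h2⟩, c.2, ⟨h3, h4⟩, rfl⟩

lemma nodup_pvCells (maps : List String) : (pvCells maps).Nodup := by
  have h : pvCells maps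
      = (PySem.List.pyRange 0 (pvN maps) 1).product (PySem.List.pyRange 0 (pvM maps) 1) := rfl
  rw [h]
  exact List.Nodup.product (PySem.List.nodup_pyRange_one _ _)
    (PySem.List.nodup_pyRange_one _ _)

def pvLandList (maps : List String) : List (Int × Int) :=
  (pvCells maps).filter (fun c => cellB maps c.1 c.2 != 'X')

lemma mem_pvLandList {maps : List String} {c : Int × Int} :
    c ∈ pvLandList maps ↔ pvLand maps c := by
  simp only [pvLandList, List.mem_filter, mem_pvCells, bne_iff_ne, ne_eq, pvLand]
  tauto

lemma nodup_pvLandList (maps : List String) : (pvLandList maps).Nodup :=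
  (nodup_pvCells maps).filter _

lemma toFinset_pvLandList (maps : List String) :
    (pvLandList maps).toFinset = pvLandFin maps := by
  apply Finset.ext
  intro p
  rw [List.mem_toFinset, mem_pvLandList, mem_landFin]

lemma length_pvLandList (maps : List String) :
    (pvLandList maps).length = (pvLandFin maps).card := by
  rw [← toFinset_pvLandList, List.toFinset_card_of_nodup (nodup_pvLandList maps)]

-- ---- generic fold reshaping ----

lemma foldl_pairs {σ : Type} (f : σ → Int → Int → σ) (is js : List Int) (st : σ) :
    is.foldl (fun st i => js.foldl (fun st j => f st i j) st) st
      = (is.flatMap (fun i => js.map (fun j => (i, j)))).foldl (fun st c => f st c.1 c.2) st := by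
  induction is generalizing st with
  | nil => rfl
  | cons i is ih =>
    simp only [List.foldl_cons, List.flatMap_cons, List.foldl_append, List.foldl_map]
    exact ih _

lemma foldl_congr' {α β : Type} (l : List α) (f g : β → α → β) (s : β)
    (h : ∀ b a, a ∈ l → f b a = g b a) : l.foldl f s = l.foldl g s := by
  induction l generalizing s with
  | nil => rfl
  | cons a l ih =>
    rw [List.foldl_cons, List.foldl_cons, h s a (by simp)]
    exact ih _ (fun b a' ha' => h b a' (by simp [ha']))

-- ---- the disjoint-set forest invariant ----

def parF (par : PySem.Dict (Int × Int) (Int × Int)) (p : Int × Int) : Int × Int :=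
  (PySem.Dict.get? par p).getD p

structure UFInv (maps : List String) (par : PySem.Dict (Int × Int) (Int × Int))
    (rt : (Int × Int) → (Int × Int)) (dp : (Int × Int) → Nat) : Prop where
  keys_eq : PySem.Dict.keys par = pvLandList maps
  get_land : ∀ p, pvLand maps p → ∃ q, PySem.Dict.get? par p = some q ∧ pvLand maps q
  rt_land : ∀ p, pvLand maps p → pvLand maps (rt p)
  rt_root : ∀ p, pvLand maps p → parF par (rt p) = rt p
  rt_parent : ∀ p, pvLand maps p → rt (parF par p) = rt p
  rt_fix : ∀ p, pvLand maps p → parF par p = p → rt p = p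
  d_dec : ∀ p, pvLand maps p → parF par p ≠ p → dp (parF par p) < dp p

def ClassIff (maps : List String) (rt : (Int × Int) → (Int × Int))
    (G : (Int × Int) → (Int × Int) → Prop) : Prop :=
  ∀ p q, pvLand maps p → pvLand maps q → (rt p = rt q ↔ Relation.ReflTransGen G p q)

def GLand (maps : List String) (G : (Int × Int) → (Int × Int) → Prop) : Prop :=
  ∀ x y, G x y → pvLand maps x ∧ pvLand maps y

lemma rtg_congr {α : Type} {G G' : α → α → Prop} (h : ∀ x y, G x y ↔ G' x y)
    {p q : α} : Relation.ReflTransGen G p q ↔ Relation.ReflTransGen G' p q := by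
  constructor <;>
    (intro hr; exact Relation.ReflTransGen.mono (fun x y hxy => by
      first
        | exact (h x y).1 hxy
        | exact (h x y).2 hxy) hr)

lemma classIff_congr {maps : List String} {rt : (Int × Int) → (Int × Int)}
    {G G' : (Int × Int) → (Int × Int) → Prop}
    (hc : ClassIff maps rt G) (h : ∀ x y, G x y ↔ G' x y) : ClassIff maps rt G' :=
  fun p q hp hq => (hc p q hp hq).trans (rtg_congr h)

lemma rtg_false {α : Type} {p q : α} :
    Relation.ReflTransGen (fun _ _ => False) p q ↔ p = q := by
  constructor
  · intro h
    induction h with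
    | refl => rfl
    | tail _ hs _ => exact absurd hs id
  · rintro rfl; exact Relation.ReflTransGen.refl

lemma rt_of_root {maps : List String} {par : PySem.Dict (Int × Int) (Int × Int)}
    {rt : (Int × Int) → (Int × Int)} {dp : (Int × Int) → Nat}
    (hinv : UFInv maps par rt dp) {p : Int × Int} (hp : pvLand maps p) :
    rt (rt p) = rt p :=
  hinv.rt_fix (rt p) (hinv.rt_land p hp) (hinv.rt_root p hp)

-- find follows the parent chain to the root; the strictly decreasing measure makes the
-- visited depths distinct, so card-of-(no deeper cells) fuel always suffices
lemma ufFind_rt {maps : List String} {par : PySem.Dict (Int × Int) (Int × Int)}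
    {rt : (Int × Int) → (Int × Int)} {dp : (Int × Int) → Nat}
    (hinv : UFInv maps par rt dp) :
    ∀ (k fuel : Nat) (p : Int × Int), pvLand maps p → dp p ≤ k →
      ((pvLandFin maps).filter (fun q => dp q ≤ dp p)).card ≤ fuel →
      ufFind par fuel p = rt p := by
  intro k
  induction k with
  | zero =>
    intro fuel p hp hd hf
    have hroot : parF par p = p := by
      by_contra hne
      have := hinv.d_dec p hp hne
      omega
    have hcard : 1 ≤ ((pvLandFin maps).filter (fun q => dp q ≤ dp p)).card := by
      refine Finset.card_pos.2 ⟨p, ?_⟩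
      simp [Finset.mem_filter, mem_landFin, hp]
    obtain ⟨f', rfl⟩ : ∃ f', fuel = f' + 1 := ⟨fuel - 1, by omega⟩
    simp only [ufFind]
    rw [show (PySem.Dict.get? par p).getD p = parF par p from rfl, hroot, if_pos rfl]
    exact (hinv.rt_fix p hp hroot).symm
  | succ k ih =>
    intro fuel p hp hd hf
    have hcard : 1 ≤ ((pvLandFin maps).filter (fun q => dp q ≤ dp p)).card := by
      refine Finset.card_pos.2 ⟨p, ?_⟩
      simp [Finset.mem_filter, mem_landFin, hp]
    obtain ⟨f', rfl⟩ : ∃ f', fuel = f' + 1 := ⟨fuel - 1, by omega⟩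
    simp only [ufFind]
    rw [show (PySem.Dict.get? par p).getD p = parF par p from rfl]
    by_cases hroot : parF par p = p
    · rw [hroot, if_pos rfl]
      exact (hinv.rt_fix p hp hroot).symm
    · rw [if_neg hroot]
      obtain ⟨q, hq, hql⟩ := hinv.get_land p hp
      have hqF : parF par p = q := by simp [parF, hq]
      have hdq : dp q < dp p := hqF ▸ hinv.d_dec p hp hroot
      have hsub : ((pvLandFin maps).filter (fun x => dp x ≤ dp q))
          ⊆ ((pvLandFin maps).filter (fun x => dp x ≤ dp p)).erase p := by
        intro x hx
        rw [Finset.mem_filter] at hx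
        rw [Finset.mem_erase, Finset.mem_filter]
        refine ⟨?_, hx.1, by omega⟩
        intro hxp; subst hxp; omega
      have hle : ((pvLandFin maps).filter (fun x => dp x ≤ dp q)).card ≤ f' := by
        have h1 := Finset.card_le_card hsub
        have h2 : (((pvLandFin maps).filter (fun x => dp x ≤ dp p)).erase p).card
            = ((pvLandFin maps).filter (fun x => dp x ≤ dp p)).card - 1 := by
          apply Finset.card_erase_of_mem
          simp [Finset.mem_filter, mem_landFin, hp]
        omega
      rw [hqF, ih f' q hql (by omega) hle, ← hinv.rt_parent p hp, hqF]

lemma items_len_eq {maps : List String} {par : PySem.Dict (Int × Int) (Int × Int)}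
    {rt : (Int × Int) → (Int × Int)} {dp : (Int × Int) → Nat}
    (hinv : UFInv maps par rt dp) :
    (PySem.Dict.items par).length = (pvLandFin maps).card := by
  have h1 : (PySem.Dict.keys par).length = (PySem.Dict.items par).length := by
    simp [PySem.Dict.keys]
  rw [← h1, hinv.keys_eq, length_pvLandList]

lemma find_at {maps : List String} {par : PySem.Dict (Int × Int) (Int × Int)}
    {rt : (Int × Int) → (Int × Int)} {dp : (Int × Int) → Nat}
    (hinv : UFInv maps par rt dp) {p : Int × Int} (hp : pvLand maps p) :
    ufFind par (PySem.Dict.items par).length p = rt p := by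
  apply ufFind_rt hinv (dp p) _ p hp le_rfl
  rw [items_len_eq hinv]
  exact Finset.card_le_card (Finset.filter_subset _ _)

lemma contains_iff_land {maps : List String} {par : PySem.Dict (Int × Int) (Int × Int)}
    {rt : (Int × Int) → (Int × Int)} {dp : (Int × Int) → Nat}
    (hinv : UFInv maps par rt dp) (c : Int × Int) :
    PySem.Dict.contains par c = true ↔ pvLand maps c := by
  rw [PySem.Dict.contains_iff_mem_keys, hinv.keys_eq, mem_pvLandList]

-- one directed edge between two land cells
def edge1 (a b x y : Int × Int) : Prop := (x = a ∧ y = b) ∨ (x = b ∧ y = a)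

-- a single union: the tree of rt a is hung under rt b
def unionRT (rt : (Int × Int) → (Int × Int)) (a b : Int × Int) :
    (Int × Int) → (Int × Int) :=
  fun p => if rt p = rt a then rt b else rt p

def unionDP (rt : (Int × Int) → (Int × Int)) (dp : (Int × Int) → Nat) (a b : Int × Int) :
    (Int × Int) → Nat :=
  fun p => if rt p = rt a then dp p + dp (rt b) + 1 else dp p

lemma uf_union {maps : List String} {par : PySem.Dict (Int × Int) (Int × Int)}
    {rt : (Int × Int) → (Int × Int)} {dp : (Int × Int) → Nat}
    {G : (Int × Int) → (Int × Int) → Prop}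
    (hinv : UFInv maps par rt dp) (hcl : ClassIff maps rt G) (hgl : GLand maps G)
    {a b : Int × Int} (ha : pvLand maps a) (hb : pvLand maps b) :
    ∃ rt' dp',
      UFInv maps
        (PySem.Dict.insert par (ufFind par (PySem.Dict.items par).length a)
          (ufFind par (PySem.Dict.items par).length b)) rt' dp' ∧
      ClassIff maps rt' (fun x y => G x y ∨ edge1 a b x y) ∧
      GLand maps (fun x y => G x y ∨ edge1 a b x y) := by
  rw [find_at hinv ha, find_at hinv hb]
  have hral : pvLand maps (rt a) := hinv.rt_land a ha
  have hrbl : pvLand maps (rt b) := hinv.rt_land b hb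
  have hrtra : rt (rt a) = rt a := rt_of_root hinv ha
  have hrtrb : rt (rt b) = rt b := rt_of_root hinv hb
  have hparF : ∀ x, parF (PySem.Dict.insert par (rt a) (rt b)) x
      = if x = rt a then rt b else parF par x := by
    intro x
    simp only [parF, PySem.Dict.get?_insert]
    split <;> simp
  refine ⟨unionRT rt a b, unionDP rt dp a b, ?_, ?_, ?_⟩
  · refine ⟨?_, ?_, ?_, ?_, ?_, ?_, ?_⟩
    · rw [PySem.Dict.keys_insert_of_contains _ _
        ((contains_iff_land hinv (rt a)).2 hral), hinv.keys_eq]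
    · intro p hp
      by_cases hpra : p = rt a
      · subst hpra
        exact ⟨rt b, by simp, hrbl⟩
      · obtain ⟨q, hq, hql⟩ := hinv.get_land p hp
        exact ⟨q, by simp [PySem.Dict.get?_insert, hpra, hq], hql⟩
    · intro p hp
      simp only [unionRT]
      by_cases h : rt p = rt a
      · rw [if_pos h]; exact hrbl
      · rw [if_neg h]; exact hinv.rt_land p hp
    · intro p hp
      simp only [unionRT]
      by_cases h : rt p = rt a
      · rw [if_pos h, hparF]
        by_cases hba : rt b = rt a
        · rw [if_pos hba]
        · rw [if_neg hba]
          exact hinv.rt_root b hb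
      · rw [if_neg h, hparF, if_neg h]
        exact hinv.rt_root p hp
    · intro p hp
      simp only [unionRT, hparF]
      by_cases hpra : p = rt a
      · subst hpra
        rw [if_pos rfl, hrtrb, hrtra, if_pos rfl]
        by_cases hba : rt b = rt a
        · rw [if_pos hba]
        · rw [if_neg hba]
      · rw [if_neg hpra, hinv.rt_parent p hp]
    · intro p hp hfix
      rw [hparF] at hfix
      simp only [unionRT]
      by_cases hpra : p = rt a
      · subst hpra
        rw [if_pos rfl] at hfix
        rw [hrtra, if_pos rfl]
        exact hfix
      · rw [if_neg hpra] at hfix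
        have h := hinv.rt_fix p hp hfix
        have hne : rt p ≠ rt a := by rw [h]; exact hpra
        rw [if_neg hne, h]
    · intro p hp hne
      rw [hparF] at hne
      simp only [unionDP, hparF]
      by_cases hpra : p = rt a
      · subst hpra
        rw [if_pos rfl] at hne
        rw [if_pos rfl, hrtrb, hrtra, if_neg hne, if_pos rfl]
        omega
      · rw [if_neg hpra] at hne
        rw [if_neg hpra, hinv.rt_parent p hp]
        have h2 := hinv.d_dec p hp hne
        by_cases h : rt p = rt a
        · rw [if_pos h, if_pos h]; omega
        · rw [if_neg h, if_neg h]; exact h2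
  · intro p q hp hq
    have mono : ∀ {x y : Int × Int}, Relation.ReflTransGen G x y →
        Relation.ReflTransGen (fun x y => G x y ∨ edge1 a b x y) x y :=
      fun h => Relation.ReflTransGen.mono (fun _ _ hxy => Or.inl hxy) h
    show (unionRT rt a b p = unionRT rt a b q) ↔ _
    simp only [unionRT]
    constructor
    · intro hpq
      by_cases h1 : rt p = rt a <;> by_cases h2 : rt q = rt a
      · exact mono ((hcl p q hp hq).1 (h1.trans h2.symm))
      · rw [if_pos h1, if_neg h2] at hpq
        have hpa := mono ((hcl p a hp ha).1 h1)
        have hab : Relation.ReflTransGen (fun x y => G x y ∨ edge1 a b x y) a b :=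
          Relation.ReflTransGen.single (Or.inr (Or.inl ⟨rfl, rfl⟩))
        have hbq := mono ((hcl b q hb hq).1 hpq)
        exact (hpa.trans hab).trans hbq
      · rw [if_neg h1, if_pos h2] at hpq
        have hpb := mono ((hcl p b hp hb).1 hpq)
        have hba : Relation.ReflTransGen (fun x y => G x y ∨ edge1 a b x y) b a :=
          Relation.ReflTransGen.single (Or.inr (Or.inr ⟨rfl, rfl⟩))
        have haq := mono ((hcl a q ha hq).1 h2.symm)
        exact (hpb.trans hba).trans haq
      · rw [if_neg h1, if_neg h2] at hpq
        exact mono ((hcl p q hp hq).1 hpq)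
    · intro hr
      clear hp hq
      induction hr with
      | refl => rfl
      | @tail c' d' _ hs ih =>
        rw [ih]
        rcases hs with hG | hE
        · obtain ⟨hcl', hdl'⟩ := hgl _ _ hG
          have hstep : rt c' = rt d' :=
            (hcl c' d' hcl' hdl').2 (Relation.ReflTransGen.single hG)
          rw [hstep]
        · rcases hE with ⟨rfl, rfl⟩ | ⟨rfl, rfl⟩
          · split_ifs <;> simp_all
          · split_ifs <;> simp_all
  · intro x y hxy
    rcases hxy with h | h
    · exact hgl x y h
    · rcases h with ⟨rfl, rfl⟩ | ⟨rfl, rfl⟩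
      · exact ⟨ha, hb⟩
      · exact ⟨hb, ha⟩

-- ---- phase steps of B, in flat (row-major cell list) form ----

def initStep (maps : List String) (par : PySem.Dict (Int × Int) (Int × Int))
    (c : Int × Int) : PySem.Dict (Int × Int) (Int × Int) :=
  if cellB maps c.1 c.2 ≠ 'X' then PySem.Dict.insert par c c else par

def ufStep (par : PySem.Dict (Int × Int) (Int × Int)) (c : Int × Int) :
    PySem.Dict (Int × Int) (Int × Int) :=
  if PySem.Dict.contains par c then
    [((c.1 + 1 : Int), c.2), (c.1, (c.2 + 1 : Int))].foldl (fun par q =>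
      if PySem.Dict.contains par q then
        PySem.Dict.insert par (ufFind par (PySem.Dict.items par).length c)
          (ufFind par (PySem.Dict.items par).length q)
      else par) par
  else par

def aStep (maps : List String) (st : List (List Char) × List Int) (c : Int × Int) :
    List (List Char) × List Int :=
  if gRead st.1 c.1 c.2 ≠ 'X' then
    let r := bfsA (pvN maps) (pvM maps) st.1 c.1 c.2
    (r.2, st.2 ++ [r.1])
  else st

def pvLandB (maps : List String) (c : Int × Int) : Bool :=
  decide (0 ≤ c.1 ∧ c.1 < pvN maps ∧ 0 ≤ c.2 ∧ c.2 < pvM maps ∧ cellB maps c.1 c.2 ≠ 'X')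

lemma pvLandB_iff {maps : List String} {c : Int × Int} :
    pvLandB maps c = true ↔ pvLand maps c := by
  simp [pvLandB, pvLand]

-- ---- phase 1: the initial forest is the identity on the land cells ----

lemma phase1_items (maps : List String) :
    PySem.Dict.items ((pvCells maps).foldl (initStep maps) PySem.Dict.empty)
      = (pvLandList maps).map (fun c => (c, c)) := by
  have h1 : (pvCells maps).foldl (initStep maps) PySem.Dict.empty
      = (pvLandList maps).foldl (fun par c => PySem.Dict.insert par c c)
          PySem.Dict.empty := by
    rw [pvLandList, List.foldl_filter]
    apply foldl_congr'
    intro par c _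
    simp only [initStep]
    split_ifs with h1 h2 h2 <;> simp_all [bne_iff_ne]
  rw [h1]
  have h2 := PySem.Dict.items_foldl_insert_fresh (l := pvLandList maps)
    (k := fun c => c) (v := fun c => c) (d := (PySem.Dict.empty : PySem.Dict (Int × Int) (Int × Int)))
    (by intro a _; simp) (by simpa using nodup_pvLandList maps)
  simpa using h2

lemma phase1_inv (maps : List String) :
    UFInv maps ((pvCells maps).foldl (initStep maps) PySem.Dict.empty) id (fun _ => 0) ∧
    ClassIff maps id (fun _ _ => False) := by
  have hitems := phase1_items maps
  have hkeys : PySem.Dict.keys ((pvCells maps).foldl (initStep maps) PySem.Dict.empty)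
      = pvLandList maps := by
    simp only [PySem.Dict.keys, hitems, List.map_map]
    exact List.map_id _
  have hget : ∀ p, pvLand maps p →
      PySem.Dict.get? ((pvCells maps).foldl (initStep maps) PySem.Dict.empty) p = some p := by
    intro p hp
    apply PySem.Dict.get?_of_mem_items
    · rw [hitems]
      exact List.mem_map.2 ⟨p, mem_pvLandList.2 hp, rfl⟩
    · rw [hkeys]; exact nodup_pvLandList maps
  have hparF : ∀ p, pvLand maps p →
      parF ((pvCells maps).foldl (initStep maps) PySem.Dict.empty) p = p := by
    intro p hp; simp [parF, hget p hp]
  constructor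
  · exact ⟨hkeys, fun p hp => ⟨p, hget p hp, hp⟩, fun p hp => hp,
      fun p hp => hparF p hp, fun p hp => by rw [hparF p hp],
      fun p _ _ => rfl, fun p hp hne => absurd (hparF p hp) hne⟩
  · intro p q _ _
    simp [rtg_false]

-- ---- phase 2: the union pass builds the adjacency classes ----

def edgeG (maps : List String) (cs : List (Int × Int)) (x y : Int × Int) : Prop :=
  ∃ c ∈ cs, pvLand maps c ∧
    ∃ q ∈ [((c.1 + 1 : Int), c.2), (c.1, (c.2 + 1 : Int))], pvLand maps q ∧ edge1 c q x y

lemma fold2_spec (maps : List String) :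
    ∀ (cs : List (Int × Int)) (par : PySem.Dict (Int × Int) (Int × Int))
      (rt : (Int × Int) → (Int × Int)) (dp : (Int × Int) → Nat)
      (G : (Int × Int) → (Int × Int) → Prop),
      UFInv maps par rt dp → ClassIff maps rt G → GLand maps G →
      ∃ rt' dp', UFInv maps (cs.foldl ufStep par) rt' dp' ∧
        ClassIff maps rt' (fun x y => G x y ∨ edgeG maps cs x y) ∧
        GLand maps (fun x y => G x y ∨ edgeG maps cs x y) := by
  intro cs
  induction cs with
  | nil =>
    intro par rt dp G hinv hcl hgl
    refine ⟨rt, dp, hinv, classIff_congr hcl ?_, ?_⟩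
    · intro x y; simp [edgeG]
    · intro x y h
      rcases h with h | h
      · exact hgl x y h
      · simp [edgeG] at h
  | cons c cs ih =>
    intro par rt dp G hinv hcl hgl
    rw [List.foldl_cons]
    have hstep : ∃ rt1 dp1, UFInv maps (ufStep par c) rt1 dp1 ∧
        ClassIff maps rt1 (fun x y => G x y ∨ edgeG maps [c] x y) ∧
        GLand maps (fun x y => G x y ∨ edgeG maps [c] x y) := by
      by_cases hc : PySem.Dict.contains par c = true
      · have hcland : pvLand maps c := (contains_iff_land hinv c).1 hc
        rw [ufStep, if_pos hc]
        simp only [List.foldl_cons, List.foldl_nil]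
        -- first neighbour (c.1 + 1, c.2)
        have step1 : ∃ rt1 dp1 par1,
            (if PySem.Dict.contains par ((c.1 + 1 : Int), c.2) then
              PySem.Dict.insert par (ufFind par (PySem.Dict.items par).length c)
                (ufFind par (PySem.Dict.items par).length ((c.1 + 1 : Int), c.2))
            else par) = par1 ∧
            UFInv maps par1 rt1 dp1 ∧
            ClassIff maps rt1 (fun x y => G x y ∨
              (pvLand maps ((c.1 + 1 : Int), c.2) ∧ edge1 c ((c.1 + 1 : Int), c.2) x y)) ∧
            GLand maps (fun x y => G x y ∨
              (pvLand maps ((c.1 + 1 : Int), c.2) ∧ edge1 c ((c.1 + 1 : Int), c.2) x y)) := by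
          by_cases hq : PySem.Dict.contains par ((c.1 + 1 : Int), c.2) = true
          · have hql : pvLand maps ((c.1 + 1 : Int), c.2) := (contains_iff_land hinv _).1 hq
            obtain ⟨rt1, dp1, hinv1, hcl1, hgl1⟩ := uf_union hinv hcl hgl hcland hql
            refine ⟨rt1, dp1, _, by rw [if_pos hq], hinv1, classIff_congr hcl1 ?_, ?_⟩
            · intro x y; constructor
              · rintro (h | h)
                · exact Or.inl h
                · exact Or.inr ⟨hql, h⟩
              · rintro (h | ⟨_, h⟩)
                · exact Or.inl h
                · exact Or.inr h
            · intro x y h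
              rcases h with h | ⟨_, h⟩
              · exact hgl1 x y (Or.inl h)
              · exact hgl1 x y (Or.inr h)
          · have hql : ¬ pvLand maps ((c.1 + 1 : Int), c.2) := by
              rw [← contains_iff_land hinv]; exact hq
            refine ⟨rt, dp, par, by rw [if_neg hq], hinv, classIff_congr hcl ?_, ?_⟩
            · intro x y; constructor
              · exact Or.inl
              · rintro (h | ⟨h, _⟩)
                · exact h
                · exact absurd h hql
            · intro x y h
              rcases h with h | ⟨h, _⟩
              · exact hgl x y h
              · exact absurd h hql
        obtain ⟨rt1, dp1, par1, hpar1, hinv1, hcl1, hgl1⟩ := step1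
        rw [hpar1]
        -- second neighbour (c.1, c.2 + 1)
        have step2 : ∃ rt2 dp2 par2,
            (if PySem.Dict.contains par1 (c.1, (c.2 + 1 : Int)) then
              PySem.Dict.insert par1 (ufFind par1 (PySem.Dict.items par1).length c)
                (ufFind par1 (PySem.Dict.items par1).length (c.1, (c.2 + 1 : Int)))
            else par1) = par2 ∧
            UFInv maps par2 rt2 dp2 ∧
            ClassIff maps rt2 (fun x y => (G x y ∨
              (pvLand maps ((c.1 + 1 : Int), c.2) ∧ edge1 c ((c.1 + 1 : Int), c.2) x y)) ∨
              (pvLand maps (c.1, (c.2 + 1 : Int)) ∧ edge1 c (c.1, (c.2 + 1 : Int)) x y)) ∧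
            GLand maps (fun x y => (G x y ∨
              (pvLand maps ((c.1 + 1 : Int), c.2) ∧ edge1 c ((c.1 + 1 : Int), c.2) x y)) ∨
              (pvLand maps (c.1, (c.2 + 1 : Int)) ∧ edge1 c (c.1, (c.2 + 1 : Int)) x y)) := by
          by_cases hq : PySem.Dict.contains par1 (c.1, (c.2 + 1 : Int)) = true
          · have hql : pvLand maps (c.1, (c.2 + 1 : Int)) := (contains_iff_land hinv1 _).1 hq
            obtain ⟨rt2, dp2, hinv2, hcl2, hgl2⟩ := uf_union hinv1 hcl1 hgl1 hcland hql
            refine ⟨rt2, dp2, _, by rw [if_pos hq], hinv2, classIff_congr hcl2 ?_, ?_⟩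
            · intro x y; constructor
              · rintro (h | h)
                · exact Or.inl h
                · exact Or.inr ⟨hql, h⟩
              · rintro (h | ⟨_, h⟩)
                · exact Or.inl h
                · exact Or.inr h
            · intro x y h
              rcases h with h | ⟨_, h⟩
              · exact hgl2 x y (Or.inl h)
              · exact hgl2 x y (Or.inr h)
          · have hql : ¬ pvLand maps (c.1, (c.2 + 1 : Int)) := by
              rw [← contains_iff_land hinv1]; exact hq
            refine ⟨rt1, dp1, par1, by rw [if_neg hq], hinv1, classIff_congr hcl1 ?_, ?_⟩
            · intro x y; constructor
              · exact Or.inl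
              · rintro (h | ⟨h, _⟩)
                · exact h
                · exact absurd h hql
            · intro x y h
              rcases h with h | ⟨h, _⟩
              · exact hgl1 x y h
              · exact absurd h hql
        obtain ⟨rt2, dp2, par2, hpar2, hinv2, hcl2, hgl2⟩ := step2
        rw [hpar2]
        refine ⟨rt2, dp2, hinv2, classIff_congr hcl2 ?_, ?_⟩
        · intro x y
          constructor
          · rintro ((h | ⟨h1, h2⟩) | ⟨h1, h2⟩)
            · exact Or.inl h
            · exact Or.inr ⟨c, List.mem_singleton.2 rfl, hcland,
                ((c.1 + 1 : Int), c.2), List.mem_cons_self .., h1, h2⟩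
            · exact Or.inr ⟨c, List.mem_singleton.2 rfl, hcland,
                (c.1, (c.2 + 1 : Int)), List.mem_cons_of_mem _ (List.mem_cons_self ..), h1, h2⟩
          · rintro (h | ⟨c', hc', hl', q, hq, h1, h2⟩)
            · exact Or.inl (Or.inl h)
            · rw [List.mem_singleton] at hc'
              subst hc'
              rcases List.mem_cons.1 hq with rfl | hq2
              · exact Or.inl (Or.inr ⟨h1, h2⟩)
              · rcases List.mem_cons.1 hq2 with rfl | hq3
                · exact Or.inr ⟨h1, h2⟩
                · exact absurd hq3 (by simp)
        · intro x y h
          rcases h with h | ⟨c', hc', hl', q, hq, h1, h2⟩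
          · exact hgl2 x y (Or.inl (Or.inl h))
          · rcases h2 with ⟨rfl, rfl⟩ | ⟨rfl, rfl⟩
            · exact ⟨hl', h1⟩
            · exact ⟨h1, hl'⟩
      · have hcland : ¬ pvLand maps c := by
          rw [← contains_iff_land hinv]; simpa using hc
        rw [ufStep, if_neg hc]
        refine ⟨rt, dp, hinv, classIff_congr hcl ?_, ?_⟩
        · intro x y; constructor
          · exact Or.inl
          · rintro (h | h)
            · exact h
            · obtain ⟨c', hc', hl', _⟩ := h
              rw [List.mem_singleton] at hc'
              subst hc'
              exact absurd hl' hcland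
        · intro x y h
          rcases h with h | ⟨c', hc', hl', _⟩
          · exact hgl x y h
          · rw [List.mem_singleton] at hc'
            subst hc'
            exact absurd hl' hcland
    obtain ⟨rt1, dp1, hinv1, hcl1, hgl1⟩ := hstep
    obtain ⟨rt', dp', hinv', hcl', hgl'⟩ := ih (ufStep par c) rt1 dp1 _ hinv1 hcl1 hgl1
    have hiff : ∀ x y, ((G x y ∨ edgeG maps [c] x y) ∨ edgeG maps cs x y)
        ↔ (G x y ∨ edgeG maps (c :: cs) x y) := by
      intro x y
      constructor
      · rintro ((h | h) | h)
        · exact Or.inl h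
        · obtain ⟨c', hc', hrest⟩ := h
          rw [List.mem_singleton] at hc'
          subst hc'
          exact Or.inr ⟨c', List.mem_cons_self .., hrest⟩
        · obtain ⟨c', hc', hrest⟩ := h
          exact Or.inr ⟨c', List.mem_cons_of_mem _ hc', hrest⟩
      · rintro (h | h)
        · exact Or.inl (Or.inl h)
        · obtain ⟨c', hc', hrest⟩ := h
          rcases List.mem_cons.1 hc' with rfl | hc2
          · exact Or.inl (Or.inr ⟨c', List.mem_singleton.2 rfl, hrest⟩)
          · exact Or.inr ⟨c', hc2, hrest⟩
    refine ⟨rt', dp', hinv', classIff_congr hcl' hiff, ?_⟩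
    intro x y h
    exact hgl' x y ((hiff x y).2 h)

-- the symmetric closure of the down/right land edges is exactly 4-adjacency on land
lemma edgeG_adj {maps : List String} {x y : Int × Int}
    (h : edgeG maps (pvCells maps) x y) :
    y ∈ pvNbrs x ∧ pvLand maps x ∧ pvLand maps y := by
  obtain ⟨c, _, hcl, q, hq, hql, he⟩ := h
  rw [List.mem_cons, List.mem_singleton] at hq
  have hnb : q ∈ pvNbrs c := by
    rcases hq with rfl | rfl <;> simp [pvNbrs]
  rcases he with ⟨rfl, rfl⟩ | ⟨rfl, rfl⟩
  · exact ⟨hnb, hcl, hql⟩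
  · exact ⟨(nbrs_symm _ _).1 hnb, hql, hcl⟩

lemma adj_edgeG {maps : List String} {x y : Int × Int}
    (hx : pvLand maps x) (hy : pvLand maps y) (hnb : y ∈ pvNbrs x) :
    edgeG maps (pvCells maps) x y := by
  have hxc : x ∈ pvCells maps := mem_pvCells.2 ⟨hx.1, hx.2.1, hx.2.2.1, hx.2.2.2.1⟩
  have hyc : y ∈ pvCells maps := mem_pvCells.2 ⟨hy.1, hy.2.1, hy.2.2.1, hy.2.2.2.1⟩
  simp only [pvNbrs, List.mem_cons, List.not_mem_nil, or_false] at hnb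
  rcases hnb with rfl | rfl | rfl | rfl
  · -- y = (x.1 - 1, x.2) : x is the down neighbour of y
    refine ⟨(x.1 - 1, x.2), hyc, hy, (x.1 - 1 + 1, x.2), by simp, ?_, Or.inr ⟨?_, rfl⟩⟩
    · simpa using hx
    · simp
  · exact ⟨x, hxc, hx, (x.1 + 1, x.2), by simp, hy, Or.inl ⟨rfl, rfl⟩⟩
  · refine ⟨(x.1, x.2 - 1), hyc, hy, (x.1, x.2 - 1 + 1), by simp, ?_, Or.inr ⟨?_, rfl⟩⟩
    · simpa using hx
    · simp
  · exact ⟨x, hxc, hx, (x.1, x.2 + 1), by simp, hy, Or.inl ⟨rfl, rfl⟩⟩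

lemma rtg_edgeG_iff_conn {maps : List String} {p q : Int × Int} (hp : pvLand maps p) :
    Relation.ReflTransGen (edgeG maps (pvCells maps)) p q ↔ pvConn maps p q := by
  constructor
  · intro h
    induction h with
    | refl => exact Relation.ReflTransGen.refl
    | tail _ hs ih =>
      obtain ⟨hnb, _, hyl⟩ := edgeG_adj hs
      exact ih.tail ⟨hnb, hyl⟩
  · intro h
    induction h with
    | refl => exact Relation.ReflTransGen.refl
    | @tail a b hc hs ih =>
      have hal : pvLand maps a := pvConn_land hp hc
      exact ih.tail (adj_edgeG hal hs.2 hs.1)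

-- ---- phase 3: grouping the cell values by root ----

def pvPSum (maps : List String) (rt : (Int × Int) → (Int × Int))
    (l : List (Int × Int)) (r : Int × Int) : Int :=
  ((l.filter (fun p => rt p == r)).map (pvVal maps)).sum

def pvReps (rt : (Int × Int) → (Int × Int)) :
    Finset (Int × Int) → List (Int × Int) → List (Int × Int)
  | _, [] => []
  | R, c :: cs => if rt c ∈ R then pvReps rt R cs else c :: pvReps rt (insert (rt c) R) cs

lemma reps_not_mem {rt : (Int × Int) → (Int × Int)} :
    ∀ {l : List (Int × Int)} {R : Finset (Int × Int)} {c : Int × Int},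
      c ∈ pvReps rt R l → rt c ∉ R := by
  intro l
  induction l with
  | nil => intro R c h; simp [pvReps] at h
  | cons c0 cs ih =>
    intro R c h
    rw [pvReps] at h
    split_ifs at h with h0
    · exact ih h
    · rcases List.mem_cons.1 h with rfl | h
      · exact h0
      · have := ih h
        intro hc
        exact this (Finset.mem_insert_of_mem hc)

lemma pvPSum_nil (maps : List String) (rt : (Int × Int) → (Int × Int)) (r : Int × Int) :
    pvPSum maps rt [] r = 0 := rfl

lemma pvPSum_cons (maps : List String) (rt : (Int × Int) → (Int × Int))
    (p : Int × Int) (l : List (Int × Int)) (r : Int × Int) :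
    pvPSum maps rt (p :: l) r
      = (if rt p = r then pvVal maps p else 0) + pvPSum maps rt l r := by
  simp only [pvPSum, List.filter_cons]
  split_ifs with h1 h2 h2 <;> simp_all

lemma sums_fold (maps : List String) (rt : (Int × Int) → (Int × Int)) :
    ∀ (todo : List (Int × Int)) (s : PySem.Dict (Int × Int) Int) (R : Finset (Int × Int)),
      (PySem.Dict.keys s).Nodup →
      (∀ r, r ∈ PySem.Dict.keys s ↔ r ∈ R) →
      PySem.Dict.items (todo.foldl (fun s p =>
          PySem.Dict.insert s (rt p) (PySem.Dict.getD s (rt p) 0 + pvVal maps p)) s)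
        = (PySem.Dict.items s).map (fun rv => (rv.1, rv.2 + pvPSum maps rt todo rv.1))
          ++ (pvReps rt R todo).map (fun c => (rt c, pvPSum maps rt todo (rt c))) := by
  intro todo
  induction todo with
  | nil =>
    intro s R _ _
    simp [pvReps, pvPSum_nil]
  | cons p ps ih =>
    intro s R hnd hiff
    rw [List.foldl_cons]
    by_cases hr : rt p ∈ R
    · have hcont : PySem.Dict.contains s (rt p) = true :=
        (PySem.Dict.contains_iff_mem_keys s (rt p)).2 ((hiff (rt p)).2 hr)
      set s' := PySem.Dict.insert s (rt p) (PySem.Dict.getD s (rt p) 0 + pvVal maps p)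
        with hs'
      have hkeys' : PySem.Dict.keys s' = PySem.Dict.keys s :=
        PySem.Dict.keys_insert_of_contains s _ hcont
      have hitems' : PySem.Dict.items s' = (PySem.Dict.items s).map
          (fun q => if q.1 == rt p
            then (rt p, PySem.Dict.getD s (rt p) 0 + pvVal maps p) else q) :=
        PySem.Dict.items_insert_of_contains s _ hcont
      have hiff1 : ∀ r, r ∈ PySem.Dict.keys s' ↔ r ∈ R := by
        intro r; rw [hkeys']; exact hiff r
      rw [ih s' R (by rw [hkeys']; exact hnd) hiff1, hitems', List.map_map]
      have hreps : pvReps rt R (p :: ps) = pvReps rt R ps := by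
        rw [pvReps, if_pos hr]
      rw [hreps]
      have hA : (PySem.Dict.items s).map
            ((fun rv : (Int × Int) × Int => (rv.1, rv.2 + pvPSum maps rt ps rv.1)) ∘
              (fun q => if q.1 == rt p
                then (rt p, PySem.Dict.getD s (rt p) 0 + pvVal maps p) else q))
          = (PySem.Dict.items s).map
              (fun rv => (rv.1, rv.2 + pvPSum maps rt (p :: ps) rv.1)) := by
        apply List.map_congr_left
        intro q hq
        obtain ⟨k, v⟩ := q
        have hkv : PySem.Dict.getD s k 0 = v :=
          PySem.Dict.getD_of_mem_items s hq hnd 0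
        simp only [Function.comp_apply]
        by_cases hk : k = rt p
        · subst hk
          simp [pvPSum_cons, hkv, add_assoc]
        · simp [pvPSum_cons, hk, Ne.symm hk]
      have hB : (pvReps rt R ps).map (fun c => (rt c, pvPSum maps rt ps (rt c)))
          = (pvReps rt R ps).map (fun c => (rt c, pvPSum maps rt (p :: ps) (rt c))) := by
        apply List.map_congr_left
        intro c hcm
        have hne : rt p ≠ rt c := fun h => (reps_not_mem hcm) (h ▸ hr)
        rw [pvPSum_cons, if_neg hne]
        simp
      rw [hA, hB]
    · have hcont : PySem.Dict.contains s (rt p) = false := by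
        by_contra hcb
        have hT : PySem.Dict.contains s (rt p) = true := by
          cases hcc : PySem.Dict.contains s (rt p) <;> simp_all
        exact hr ((hiff (rt p)).1 ((PySem.Dict.contains_iff_mem_keys s (rt p)).1 hT))
      have hgd : PySem.Dict.getD s (rt p) 0 = 0 :=
        PySem.Dict.getD_of_not_contains s 0 hcont
      set s' := PySem.Dict.insert s (rt p) (PySem.Dict.getD s (rt p) 0 + pvVal maps p)
        with hs'
      have hitems' : PySem.Dict.items s'
          = PySem.Dict.items s ++ [(rt p, pvVal maps p)] := by
        rw [hs', PySem.Dict.items_insert_of_not_contains s _ hcont, hgd]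
        simp
      have hkeys' : PySem.Dict.keys s' = PySem.Dict.keys s ++ [rt p] := by
        simp [PySem.Dict.keys, hitems']
      have hnd' : (PySem.Dict.keys s').Nodup := by
        rw [hkeys', List.nodup_append]
        refine ⟨hnd, by simp, ?_⟩
        intro x hx y hy
        rw [List.mem_singleton] at hy
        subst hy
        intro hxy
        exact hr ((hiff _).1 (hxy ▸ hx))
      have hiff' : ∀ r, r ∈ PySem.Dict.keys s' ↔ r ∈ insert (rt p) R := by
        intro r
        rw [hkeys', List.mem_append, List.mem_singleton, Finset.mem_insert, hiff r]
        tauto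
      rw [ih s' (insert (rt p) R) hnd' hiff', hitems']
      have hreps : pvReps rt R (p :: ps) = p :: pvReps rt (insert (rt p) R) ps := by
        rw [pvReps, if_neg hr]
      rw [hreps, List.map_append, List.append_assoc, List.map_cons]
      have hA : (PySem.Dict.items s).map
            (fun rv : (Int × Int) × Int => (rv.1, rv.2 + pvPSum maps rt ps rv.1))
          = (PySem.Dict.items s).map
              (fun rv => (rv.1, rv.2 + pvPSum maps rt (p :: ps) rv.1)) := by
        apply List.map_congr_left
        intro q hq
        obtain ⟨k, v⟩ := q
        have hkR : k ∈ R := (hiff k).1 (PySem.Dict.mem_keys_of_mem_items s hq)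
        have hne : rt p ≠ k := fun h => hr (h ▸ hkR)
        rw [pvPSum_cons, if_neg hne]
        simp
      have hB : (pvReps rt (insert (rt p) R) ps).map
            (fun c => (rt c, pvPSum maps rt ps (rt c)))
          = (pvReps rt (insert (rt p) R) ps).map
              (fun c => (rt c, pvPSum maps rt (p :: ps) (rt c))) := by
        apply List.map_congr_left
        intro c hcm
        have hne : rt p ≠ rt c := fun h =>
          (reps_not_mem hcm) (h ▸ Finset.mem_insert_self _ _)
        rw [pvPSum_cons, if_neg hne]
        simp
      rw [hA, hB]
      simp only [List.map_cons, List.map_nil, List.singleton_append]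
      rw [pvPSum_cons, if_pos rfl]

-- ---- the component sum equals the class sum over the land list ----

lemma compSum_eq (maps : List String) (rt : (Int × Int) → (Int × Int))
    (hcls : ∀ p q, pvLand maps p → pvLand maps q → (rt p = rt q ↔ pvConn maps p q))
    {c : Int × Int} (hc : pvLand maps c) :
    (∑ p ∈ pvComp maps c, pvVal maps p) = pvPSum maps rt (pvLandList maps) (rt c) := by
  have hset : pvComp maps c
      = ((pvLandList maps).filter (fun p => rt p == rt c)).toFinset := by
    ext p
    rw [List.mem_toFinset, List.mem_filter, mem_pvComp, mem_pvLandList, beq_iff_eq]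
    constructor
    · rintro ⟨hpl, hconn⟩
      exact ⟨hpl, (hcls p c hpl hc).2 (pvConn_symm hc hconn)⟩
    · rintro ⟨hpl, hrt⟩
      exact ⟨hpl, pvConn_symm hpl ((hcls p c hpl hc).1 hrt)⟩
  rw [hset, List.sum_toFinset _ ((nodup_pvLandList maps).filter _)]
  rfl

-- ---- A's scan, characterised against the class structure ----

noncomputable def pvBAux (maps : List String) (rt : (Int × Int) → (Int × Int)) :
    Finset (Int × Int) → List (Int × Int) → List Int
  | _, [] => []
  | R, c :: cs =>
      if pvLandB maps c = true ∧ rt c ∉ R then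
        (∑ p ∈ pvComp maps c, pvVal maps p) :: pvBAux maps rt (insert (rt c) R) cs
      else pvBAux maps rt R cs

lemma afold_spec (maps : List String) (hrow : RowsOK maps)
    (rt : (Int × Int) → (Int × Int))
    (hcls : ∀ p q, pvLand maps p → pvLand maps q → (rt p = rt q ↔ pvConn maps p q)) :
    ∀ (cs : List (Int × Int)), (∀ c ∈ cs, c ∈ pvCells maps) →
      ∀ (g : List (List Char)) (ans : List Int) (M R : Finset (Int × Int)),
        RepA maps g M → (∀ p, p ∈ M ↔ (pvLand maps p ∧ rt p ∈ R)) →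
        (cs.foldl (aStep maps) (g, ans)).2 = ans ++ pvBAux maps rt R cs := by
  intro cs
  induction cs with
  | nil =>
    intro _ g ans M R _ _
    simp [pvBAux]
  | cons c cs ih =>
    intro hcs g ans M R hrep hMR
    have hcc : c ∈ pvCells maps := hcs c (by simp)
    obtain ⟨hb1, hb2, hb3, hb4⟩ := mem_pvCells.1 hcc
    have hread : gRead g c.1 c.2 = if (c.1, c.2) ∈ M then 'X' else cellB maps c.1 c.2 :=
      hrep.2 c.1 c.2 hb1 hb2 hb3 hb4
    rw [List.foldl_cons]
    by_cases hland : pvLand maps c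
    · by_cases hR : rt c ∈ R
      · -- already visited: its whole class is marked
        have hcM : c ∈ M := (hMR c).2 ⟨hland, hR⟩
        have hskip : aStep maps (g, ans) c = (g, ans) := by
          simp only [aStep, hread]
          rw [if_neg]
          simp [hcM]
        rw [hskip, ih (fun d hd => hcs d (by simp [hd])) g ans M R hrep hMR]
        rw [pvBAux, if_neg (by simp [hR])]
      · -- a fresh seed: A floods exactly the component of c
        have hcM : c ∉ M := fun h => hR ((hMR c).1 h).2
        have hMsub : M ⊆ pvLandFin maps := by
          intro p hp
          exact (mem_landFin maps p).2 ((hMR p).1 hp).1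
        have hclosed : pvClosed maps M := by
          intro p hp dd hdd hddl
          obtain ⟨hpl, hpR⟩ := (hMR p).1 hp
          have : rt dd = rt p :=
            (hcls dd p hddl hpl).2
              (pvConn_symm hpl (Relation.ReflTransGen.single ⟨hdd, hddl⟩))
          exact (hMR dd).2 ⟨hddl, this ▸ hpR⟩
        obtain ⟨C, hC, hval, hrep', _⟩ := bfsA_spec maps hrow g M c hrep hMsub hland hcM
        have hCeq : C = pvComp maps c :=
          compOK_unique hC (compOK_of_closed hland hcM hclosed)
        have htake : aStep maps (g, ans) c
            = ((bfsA (pvN maps) (pvM maps) g c.1 c.2).2,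
               ans ++ [(bfsA (pvN maps) (pvM maps) g c.1 c.2).1]) := by
          simp only [aStep, hread]
          rw [if_pos]
          simp [hcM, hland.2.2.2.2]
        rw [htake]
        have hMR' : ∀ p, p ∈ M ∪ C ↔ (pvLand maps p ∧ rt p ∈ insert (rt c) R) := by
          intro p
          rw [Finset.mem_union, hCeq, mem_pvComp, hMR p, Finset.mem_insert]
          constructor
          · rintro (⟨h1, h2⟩ | ⟨h1, h2⟩)
            · exact ⟨h1, Or.inr h2⟩
            · exact ⟨h1, Or.inl ((hcls p c h1 hland).2 (pvConn_symm hland h2))⟩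
          · rintro ⟨h1, h2 | h2⟩
            · exact Or.inr ⟨h1, pvConn_symm h1 ((hcls p c h1 hland).1 h2)⟩
            · exact Or.inl ⟨h1, h2⟩
        rw [ih (fun d hd => hcs d (by simp [hd])) _ _ (M ∪ C) (insert (rt c) R) hrep' hMR']
        rw [pvBAux, if_pos ⟨pvLandB_iff.2 hland, hR⟩, hval, hCeq]
        simp
    · -- sea cell: both sides skip
      have hcM : c ∉ M := fun h => hland ((hMR c).1 h).1
      have hX : cellB maps c.1 c.2 = 'X' := by
        by_contra hX
        exact hland ⟨hb1, hb2, hb3, hb4, hX⟩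
      have hskip : aStep maps (g, ans) c = (g, ans) := by
        simp only [aStep, hread]
        rw [if_neg]
        simp [hcM, hX]
      rw [hskip, ih (fun d hd => hcs d (by simp [hd])) g ans M R hrep hMR]
      rw [pvBAux, if_neg]
      intro hcon
      exact hland (pvLandB_iff.1 hcon.1)

-- ---- glue: A's seed list is exactly B's first-representative list ----

lemma glue (maps : List String) (rt : (Int × Int) → (Int × Int))
    (hcls : ∀ p q, pvLand maps p → pvLand maps q → (rt p = rt q ↔ pvConn maps p q)) :
    ∀ (cs : List (Int × Int)) (R : Finset (Int × Int)), (∀ c ∈ cs, c ∈ pvCells maps) →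
      pvBAux maps rt R cs
        = (pvReps rt R (cs.filter (fun c => cellB maps c.1 c.2 != 'X'))).map
            (fun c => pvPSum maps rt (pvLandList maps) (rt c)) := by
  intro cs
  induction cs with
  | nil => intro R _; simp [pvBAux, pvReps]
  | cons c cs ih =>
    intro R hcs
    have hcc : c ∈ pvCells maps := hcs c (by simp)
    obtain ⟨hb1, hb2, hb3, hb4⟩ := mem_pvCells.1 hcc
    by_cases hX : cellB maps c.1 c.2 = 'X'
    · have hland : ¬ pvLand maps c := fun h => h.2.2.2.2 hX
      rw [pvBAux, if_neg (fun hcon => hland (pvLandB_iff.1 hcon.1))]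
      rw [List.filter_cons_of_neg (by simp [hX])]
      exact ih R (fun d hd => hcs d (by simp [hd]))
    · have hland : pvLand maps c := ⟨hb1, hb2, hb3, hb4, hX⟩
      rw [List.filter_cons_of_pos (by simp [hX])]
      by_cases hR : rt c ∈ R
      · rw [pvBAux, if_neg (by simp [hR]), pvReps, if_pos hR]
        exact ih R (fun d hd => hcs d (by simp [hd]))
      · rw [pvBAux, if_pos ⟨pvLandB_iff.2 hland, hR⟩, pvReps, if_neg hR, List.map_cons]
        rw [ih (insert (rt c) R) (fun d hd => hcs d (by simp [hd]))]
        rw [compSum_eq maps rt hcls hland]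

-- ===== VERDICT (by name: the statement is the Claim_ definition above) =====
theorem solution_spec : Claim_equal_solution := by
  intro maps _hdom hpre
  unfold Spec_solution
  obtain ⟨hne, hprows⟩ := hpre
  have hrow : RowsOK maps := by
    intro t ht
    have h := (hprows t ht).1
    rw [pvM_eq maps]
    exact_mod_cast h
  -- flatten A's nested scan
  have eqA : solution maps =
      (if ((PySem.List.pyRange 0 (pvN maps) 1).foldl (fun st i =>
          (PySem.List.pyRange 0 (pvM maps) 1).foldl (fun st j => aStep maps st (i, j)) st)
          (maps.map String.toList, ([] : List Int))).2 = [] then [-1]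
       else PySem.List.sorted ((PySem.List.pyRange 0 (pvN maps) 1).foldl (fun st i =>
          (PySem.List.pyRange 0 (pvM maps) 1).foldl (fun st j => aStep maps st (i, j)) st)
          (maps.map String.toList, ([] : List Int))).2 (fun x => x) false) := rfl
  have hfoldA : ((PySem.List.pyRange 0 (pvN maps) 1).foldl (fun st i =>
      (PySem.List.pyRange 0 (pvM maps) 1).foldl (fun st j => aStep maps st (i, j)) st)
      (maps.map String.toList, ([] : List Int)))
      = (pvCells maps).foldl (aStep maps) (maps.map String.toList, ([] : List Int)) :=
    foldl_pairs (fun st i j => aStep maps st (i, j)) _ _ _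
  rw [hfoldA] at eqA
  -- flatten B's three passes
  have eqB : solution_alt maps =
      (let par1 := (PySem.List.pyRange 0 (pvN maps) 1).foldl (fun par i =>
          (PySem.List.pyRange 0 (pvM maps) 1).foldl (fun par j => ufStep par (i, j)) par)
          ((PySem.List.pyRange 0 (pvN maps) 1).foldl (fun par i =>
            (PySem.List.pyRange 0 (pvM maps) 1).foldl
              (fun par j => initStep maps par (i, j)) par) PySem.Dict.empty)
       let sums := (PySem.Dict.keys par1).foldl (fun (s : PySem.Dict (Int × Int) Int) p =>
          PySem.Dict.insert s (ufFind par1 (PySem.Dict.items par1).length p)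
            (PySem.Dict.getD s (ufFind par1 (PySem.Dict.items par1).length p) 0
              + pyIntCell (cellB maps p.1 p.2))) PySem.Dict.empty
       if PySem.List.sorted (PySem.Dict.values sums) (fun x => x) false = [] then [-1]
       else PySem.List.sorted (PySem.Dict.values sums) (fun x => x) false) := rfl
  have hfold0 : ((PySem.List.pyRange 0 (pvN maps) 1).foldl (fun par i =>
      (PySem.List.pyRange 0 (pvM maps) 1).foldl (fun par j => initStep maps par (i, j)) par)
      PySem.Dict.empty)
      = (pvCells maps).foldl (initStep maps) PySem.Dict.empty :=
    foldl_pairs (fun par i j => initStep maps par (i, j)) _ _ _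
  rw [hfold0] at eqB
  have hfold1 : ((PySem.List.pyRange 0 (pvN maps) 1).foldl (fun par i =>
      (PySem.List.pyRange 0 (pvM maps) 1).foldl (fun par j => ufStep par (i, j)) par)
      ((pvCells maps).foldl (initStep maps) PySem.Dict.empty))
      = (pvCells maps).foldl ufStep ((pvCells maps).foldl (initStep maps) PySem.Dict.empty) :=
    foldl_pairs (fun par i j => ufStep par (i, j)) _ _ _
  rw [hfold1] at eqB
  -- the union-find structure after the two passes
  obtain ⟨hinv0, hcl0⟩ := phase1_inv maps
  obtain ⟨rt, dp, hinv1, hcl1, _⟩ :=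
    fold2_spec maps (pvCells maps) _ id (fun _ => 0) (fun _ _ => False) hinv0 hcl0
      (fun x y h => absurd h id)
  have hcl2 : ClassIff maps rt (edgeG maps (pvCells maps)) :=
    classIff_congr hcl1 (fun x y => by tauto)
  have hcls : ∀ p q, pvLand maps p → pvLand maps q → (rt p = rt q ↔ pvConn maps p q) :=
    fun p q hp hq => (hcl2 p q hp hq).trans (rtg_edgeG_iff_conn hp)
  set par1 := (pvCells maps).foldl ufStep ((pvCells maps).foldl (initStep maps)
    PySem.Dict.empty) with hpar1def
  -- phase 3: rewrite find to rt, then group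
  have hsums_congr : (PySem.Dict.keys par1).foldl (fun (s : PySem.Dict (Int × Int) Int) p =>
        PySem.Dict.insert s (ufFind par1 (PySem.Dict.items par1).length p)
          (PySem.Dict.getD s (ufFind par1 (PySem.Dict.items par1).length p) 0
            + pyIntCell (cellB maps p.1 p.2))) PySem.Dict.empty
      = (pvLandList maps).foldl (fun (s : PySem.Dict (Int × Int) Int) p =>
          PySem.Dict.insert s (rt p) (PySem.Dict.getD s (rt p) 0 + pvVal maps p))
          PySem.Dict.empty := by
    rw [hinv1.keys_eq]
    apply foldl_congr'
    intro s p hp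
    rw [find_at hinv1 (mem_pvLandList.1 hp)]
    rfl
  have hitems := sums_fold maps rt (pvLandList maps) PySem.Dict.empty ∅
    (by simp [PySem.Dict.keys_empty]) (by simp [PySem.Dict.keys_empty])
  have hvalues : PySem.Dict.values ((pvLandList maps).foldl
      (fun (s : PySem.Dict (Int × Int) Int) p =>
        PySem.Dict.insert s (rt p) (PySem.Dict.getD s (rt p) 0 + pvVal maps p))
      PySem.Dict.empty)
      = (pvReps rt ∅ (pvLandList maps)).map
          (fun c => pvPSum maps rt (pvLandList maps) (rt c)) := by
    simp only [PySem.Dict.values, hitems]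
    have hemp : PySem.Dict.items (PySem.Dict.empty : PySem.Dict (Int × Int) Int) = [] := rfl
    rw [hemp]
    simp only [List.map_nil, List.nil_append, List.map_map]
    rfl
  -- A's scan over the same cells
  have hrep0 : RepA maps (maps.map String.toList) (∅ : Finset (Int × Int)) := by
    refine ⟨by simp [List.map_map, Function.comp], ?_⟩
    intro x y hx0 _ hy0 _
    rw [gRead_map maps x y hx0 hy0]
    simp
  have hansA : ((pvCells maps).foldl (aStep maps)
      (maps.map String.toList, ([] : List Int))).2
      = pvBAux maps rt ∅ (pvCells maps) := by
    have h := afold_spec maps hrow rt hcls (pvCells maps) (fun c hc => hc)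
      (maps.map String.toList) [] ∅ ∅ hrep0 (by simp)
    simpa using h
  have hglue : pvBAux maps rt ∅ (pvCells maps)
      = (pvReps rt ∅ (pvLandList maps)).map
          (fun c => pvPSum maps rt (pvLandList maps) (rt c)) := by
    rw [glue maps rt hcls (pvCells maps) ∅ (fun c hc => hc)]
    rfl
  -- both lists are equal before the final sort / emptiness test
  rw [eqA, eqB]
  simp only [hsums_congr, hvalues, hansA, hglue]
  set L := (pvReps rt ∅ (pvLandList maps)).map
    (fun c => pvPSum maps rt (pvLandList maps) (rt c)) with hL
  by_cases hLnil : L = []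
  · rw [if_pos hLnil, if_pos (by rw [hLnil]; rfl)]
  · rw [if_neg hLnil, if_neg (by
      rw [PySem.List.sorted_eq_nil_iff]
      exact hLnil)]
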